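-- pv_equiv track=rewrite | github.com/S-Christensen/cartographersStudy | spring/midgameEvaluation.py | stoneside_progress
-- ===== SOURCE A (Python) =====
-- def dfs(grid, row, col, visited, terrain_type):
--     stack = [(row, col)]
--     cluster = []
--
--     while stack:
--         r, c = stack.pop()
--         if (r, c) not in visited and grid[r][c] == terrain_type:
--             visited.add((r, c))
--             cluster.append((r, c))
--             for dr, dc in [(1, 0), (-1, 0), (0, 1), (0, -1)]:
--                 nr, nc = r + dr, c + dc
--                 if 0 <= nr < len(grid) and 0 <= nc < len(grid[0]):
--                     stack.append((nr, nc))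
--     return cluster
--
-- def stoneside_progress(grid):
--     visited = set()
--     clusters = []
--
--     for r in range(len(grid)):
--         for c in range(len(grid[0])):
--             if (r, c) not in visited and grid[r][c] == "Forest":
--                 cluster = dfs(grid, r, c, visited, "Forest")
--                 clusters.append(cluster)
--
--     connected_mountains = set()
--
--     for cluster in clusters:
--         mountains = set()
--         for r, c in cluster:
--             for dr, dc in [(1,0), (-1,0), (0,1), (0,-1)]:
--                 nr, nc = r + dr, c + dc
--                 if 0 <= nr < len(grid) and 0 <= nc < len(grid[0]):
--                     if grid[nr][nc] == "Mountain":
--                         mountains.add((nr, nc))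
--
--         if len(mountains) >= 2:
--             connected_mountains |= mountains
--
--     return len(connected_mountains) * 3
-- ===== SOURCE B (Python) =====
-- def stoneside_progress(grid):
--     rows = len(grid)
--     cols = len(grid[0]) if grid else 0
--
--     # Disjoint-set with O(1) find: comp maps each Forest cell to its current
--     # representative, members maps each representative to its member list;
--     # merging relabels the smaller class (weighted eager union).
--     comp = {}
--     members = {}
--     for r in range(rows):
--         for c in range(cols):
--             if grid[r][c] == "Forest":
--                 comp[(r, c)] = (r, c)
--                 members[(r, c)] = [(r, c)]
--
--     for r in range(rows):
--         for c in range(cols):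
--             if (r, c) in comp:
--                 for nbr in ((r + 1, c), (r, c + 1)):
--                     if nbr in comp:
--                         a, b = comp[(r, c)], comp[nbr]
--                         if a != b:
--                             if len(members[a]) < len(members[b]):
--                                 a, b = b, a
--                             for cell in members[b]:
--                                 comp[cell] = a
--                             members[a].extend(members[b])
--                             del members[b]
--
--     total = set()
--     for cluster in members.values():
--         mounts = set()
--         for (r, c) in cluster:
--             for (nr, nc) in ((r + 1, c), (r - 1, c), (r, c + 1), (r, c - 1)):
--                 if 0 <= nr < rows and 0 <= nc < cols and grid[nr][nc] == "Mountain":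
--                     mounts.add((nr, nc))
--         if len(mounts) >= 2:
--             total |= mounts
--     return len(total) * 3
-- ===== Notes on version B (the rewrite author's own statement) =====
-- stated objective: alternative
-- what changed: Replaces the per-cluster stack DFS with a shared visited set by a weighted eager disjoint-set: every Forest cell gets a representative in a dict, right/down Forest adjacencies merge classes by relabelling the smaller member list, and clusters are read off the member lists.
import Mathlib
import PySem

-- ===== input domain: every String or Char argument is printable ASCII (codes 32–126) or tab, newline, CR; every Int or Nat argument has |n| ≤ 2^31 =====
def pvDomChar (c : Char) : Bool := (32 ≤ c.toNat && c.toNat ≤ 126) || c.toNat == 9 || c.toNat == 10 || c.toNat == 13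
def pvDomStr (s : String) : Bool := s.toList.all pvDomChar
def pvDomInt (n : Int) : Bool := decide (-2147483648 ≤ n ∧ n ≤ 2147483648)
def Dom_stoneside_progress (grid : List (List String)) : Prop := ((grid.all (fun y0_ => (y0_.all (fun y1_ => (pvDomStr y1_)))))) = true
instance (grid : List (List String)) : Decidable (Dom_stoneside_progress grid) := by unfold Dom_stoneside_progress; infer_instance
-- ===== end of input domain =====

-- B replaces A's per-cluster stack DFS (shared visited set) by a weighted eager disjoint-set over
-- right/down Forest adjacencies (dict of representatives plus member lists, smaller class relabelled);
-- same cost class, different data structure ("alternative", not claimed faster).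

-- ===== PORT A =====
-- grid[r][c]; every access the Pythons perform is in range under Pre_ (PYSEM.md sanctions the getD form there)
def pvCell (grid : List (List String)) (r c : Int) : String :=
  PySem.List.pyGetD (PySem.List.pyGetD grid r []) c ""

-- A's dfs: stack loop; fuel only makes the recursion structural (proved sufficient below, never reached)
def pvDfs (grid : List (List String)) (terrain : String) :
    Nat → List (Int × Int) → PySem.Set (Int × Int) → List (Int × Int) →
    List (Int × Int) × PySem.Set (Int × Int)
  | _, [], vis, cl => (cl, vis)
  | 0, _ :: _, vis, cl => (cl, vis)
  | fuel + 1, (r, c) :: stack, vis, cl =>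
    if (r, c) ∉ vis ∧ pvCell grid r c = terrain then
      pvDfs grid terrain fuel
        ([((1 : Int), (0 : Int)), (-1, 0), (0, 1), (0, -1)].foldl (fun st d =>
          if 0 ≤ r + d.1 ∧ r + d.1 < (grid.length : Int) ∧
             0 ≤ c + d.2 ∧ c + d.2 < ((grid.headD []).length : Int)
          then (r + d.1, c + d.2) :: st else st) stack)
        (PySem.Set.add vis (r, c)) (cl ++ [(r, c)])
    else pvDfs grid terrain fuel stack vis cl

def stoneside_progress (grid : List (List String)) : Int :=
  let rows : Int := grid.length
  let cols : Int := ((grid.headD []).length : Int)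
  let s :=
    (PySem.List.pyRange 0 rows 1).foldl (fun s r =>
      (PySem.List.pyRange 0 cols 1).foldl (fun s c =>
        if (r, c) ∉ s.1 ∧ pvCell grid r c = "Forest" then
          let res := pvDfs grid "Forest" (5 * (rows.toNat * cols.toNat) + 1) [(r, c)] s.1 []
          (res.2, s.2 ++ [res.1])
        else s) s)
      ((PySem.Set.empty : PySem.Set (Int × Int)), ([] : List (List (Int × Int))))
  let total :=
    s.2.foldl (fun tot cluster =>
      let mounts := cluster.foldl (fun m p =>
        [((1 : Int), (0 : Int)), (-1, 0), (0, 1), (0, -1)].foldl (fun m d =>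
          if 0 ≤ p.1 + d.1 ∧ p.1 + d.1 < rows ∧ 0 ≤ p.2 + d.2 ∧ p.2 + d.2 < cols then
            if pvCell grid (p.1 + d.1) (p.2 + d.2) = "Mountain" then
              PySem.Set.add m (p.1 + d.1, p.2 + d.2)
            else m
          else m) m) (PySem.Set.empty : PySem.Set (Int × Int))
      if 2 ≤ PySem.Set.len mounts then PySem.Set.union tot mounts else tot)
      (PySem.Set.empty : PySem.Set (Int × Int))
  (PySem.Set.len total : Int) * 3

-- ===== PORT B =====
def stoneside_progress_alt (grid : List (List String)) : Int :=
  let rows : Int := grid.length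
  let cols : Int := match grid with | [] => 0 | g0 :: _ => (g0.length : Int)
  -- disjoint-set: comp maps each Forest cell to its representative, members maps representatives to member lists
  let s0 :=
    (PySem.List.pyRange 0 rows 1).foldl (fun s r =>
      (PySem.List.pyRange 0 cols 1).foldl (fun s c =>
        if pvCell grid r c = "Forest" then
          (s.1.insert (r, c) (r, c), s.2.insert (r, c) [((r : Int), (c : Int))])
        else s) s)
      ((PySem.Dict.empty : PySem.Dict (Int × Int) (Int × Int)),
       (PySem.Dict.empty : PySem.Dict (Int × Int) (List (Int × Int))))
  let s1 :=
    (PySem.List.pyRange 0 rows 1).foldl (fun s r =>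
      (PySem.List.pyRange 0 cols 1).foldl (fun s c =>
        if s.1.contains (r, c) then
          [((r + 1 : Int), (c : Int)), (r, (c + 1 : Int))].foldl (fun s nbr =>
            if s.1.contains nbr then
              let a := s.1.getD (r, c) (r, c)
              let b := s.1.getD nbr nbr
              if a ≠ b then
                let ab := if (s.2.getD a []).length < (s.2.getD b []).length then (b, a) else (a, b)
                ((s.2.getD ab.2 []).foldl (fun d cell => d.insert cell ab.1) s.1,
                 (s.2.modify ab.1 [] (fun l => l ++ s.2.getD ab.2 [])).erase ab.2)
              else s
            else s) s
        else s) s) s0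
  let total :=
    (PySem.Dict.values s1.2).foldl (fun tot cluster =>
      let mounts := cluster.foldl (fun m p =>
        [((p.1 + 1 : Int), (p.2 : Int)), (p.1 - 1, p.2), (p.1, p.2 + 1), (p.1, p.2 - 1)].foldl
          (fun m q =>
            if (0 ≤ q.1 ∧ q.1 < rows ∧ 0 ≤ q.2 ∧ q.2 < cols) ∧ pvCell grid q.1 q.2 = "Mountain"
            then PySem.Set.add m q else m) m) (PySem.Set.empty : PySem.Set (Int × Int))
      if 2 ≤ PySem.Set.len mounts then PySem.Set.union tot mounts else tot)
      (PySem.Set.empty : PySem.Set (Int × Int))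
  (PySem.Set.len total : Int) * 3

-- ===== PRECONDITION & SPEC =====
-- Pre_ excludes exactly the ragged grids with a row shorter than row 0, on which the Python A
-- (and B alike) raises IndexError; on every other input A returns normally.
def Pre_stoneside_progress (grid : List (List String)) : Prop :=
  ∀ row ∈ grid, (grid.headD []).length ≤ row.length

instance (grid : List (List String)) : Decidable (Pre_stoneside_progress grid) := by
  unfold Pre_stoneside_progress; infer_instance

def pvWitness_stoneside_progress : List (List String) :=
  [["Forest", "Mountain"], ["Mountain", "Water"]]

def Spec_stoneside_progress (grid : List (List String)) (out : Int) : Prop :=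
  out = stoneside_progress_alt grid
instance (grid : List (List String)) (out : Int) : Decidable (Spec_stoneside_progress grid out) := by
  unfold Spec_stoneside_progress; infer_instance

-- ===== CLAIM (what is proved, stated in full; the proofs are below) =====
def Claim_equal_stoneside_progress : Prop :=
  ∀ (grid : List (List String)), Dom_stoneside_progress grid → Pre_stoneside_progress grid →
    Spec_stoneside_progress grid (stoneside_progress grid)

-- ===== LEMMAS AND PROOFS =====

/-! Core notions: in-bounds cells, Forest cells, 4-adjacency, Forest paths avoiding a visited set. -/

def pvForestb (grid : List (List String)) (p : Int × Int) : Bool :=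
  decide (0 ≤ p.1) && decide (p.1 < (grid.length : Int)) && decide (0 ≤ p.2) &&
  decide (p.2 < ((grid.headD []).length : Int)) && decide (pvCell grid p.1 p.2 = "Forest")

def pvInb (grid : List (List String)) (p : Int × Int) : Prop :=
  0 ≤ p.1 ∧ p.1 < (grid.length : Int) ∧ 0 ≤ p.2 ∧ p.2 < ((grid.headD []).length : Int)

abbrev pvForest (grid : List (List String)) (p : Int × Int) : Prop := pvForestb grid p = true

lemma pvForest_iff (grid : List (List String)) (p : Int × Int) :
    pvForest grid p ↔ pvInb grid p ∧ pvCell grid p.1 p.2 = "Forest" := by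
  simp [pvForest, pvForestb, pvInb, and_assoc]

def pvAdj (p q : Int × Int) : Prop :=
  q = (p.1 + 1, p.2) ∨ q = (p.1 - 1, p.2) ∨ q = (p.1, p.2 + 1) ∨ q = (p.1, p.2 - 1)

lemma pvAdj_symm {p q : Int × Int} (h : pvAdj p q) : pvAdj q p := by
  rcases h with h | h | h | h <;> subst h <;> simp [pvAdj, Prod.ext_iff]

def pvStep (grid : List (List String)) (V : List (Int × Int)) (x y : Int × Int) : Prop :=
  pvAdj x y ∧ pvForest grid y ∧ y ∉ V

def pvPath (grid : List (List String)) (V : List (Int × Int)) : (Int × Int) → (Int × Int) → Prop :=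
  Relation.ReflTransGen (pvStep grid V)

def pvReach (grid : List (List String)) (p q : Int × Int) : Prop :=
  pvForest grid p ∧ pvPath grid [] p q

lemma pvPath_mono {grid : List (List String)} {V V' : List (Int × Int)}
    (h : ∀ y, y ∈ V' → y ∈ V) {p q : Int × Int} (hp : pvPath grid V p q) : pvPath grid V' p q := by
  refine Relation.ReflTransGen.mono ?_ hp
  rintro x y ⟨ha, hf, hv⟩
  exact ⟨ha, hf, fun hy => hv (h y hy)⟩

lemma pvReach_forest {grid : List (List String)} {p q : Int × Int} (h : pvReach grid p q) :
    pvForest grid q := by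
  obtain ⟨hf, hp⟩ := h
  induction hp with
  | refl => exact hf
  | tail _ st _ => exact st.2.1

lemma pvReach_refl {grid : List (List String)} {p : Int × Int} (h : pvForest grid p) :
    pvReach grid p p := ⟨h, Relation.ReflTransGen.refl⟩

lemma pvReach_trans {grid : List (List String)} {p q r : Int × Int}
    (h1 : pvReach grid p q) (h2 : pvReach grid q r) : pvReach grid p r :=
  ⟨h1.1, Relation.ReflTransGen.trans h1.2 h2.2⟩

lemma pvReach_symm {grid : List (List String)} {p q : Int × Int} (h : pvReach grid p q) :
    pvReach grid q p := by
  obtain ⟨hf, hp⟩ := h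
  refine ⟨pvReach_forest ⟨hf, hp⟩, ?_⟩
  induction hp with
  | refl => exact Relation.ReflTransGen.refl
  | @tail b c _ st ih =>
      have hb : pvForest grid b := pvReach_forest ⟨hf, by assumption⟩
      exact Relation.ReflTransGen.trans
        (Relation.ReflTransGen.single ⟨pvAdj_symm st.1, hb, by simp⟩) ih

/-! `pvR S V x`: x is found by a search started from the agenda `S`, avoiding `V`. -/

def pvR (grid : List (List String)) (S V : List (Int × Int)) (x : Int × Int) : Prop :=
  ∃ p ∈ S, pvForest grid p ∧ p ∉ V ∧ pvPath grid V p x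

lemma pvR_nil {grid : List (List String)} {V : List (Int × Int)} {x : Int × Int} :
    ¬ pvR grid [] V x := by simp [pvR]

lemma pvR_congr {grid : List (List String)} {S S' V V' : List (Int × Int)}
    (hS : ∀ p, p ∈ S ↔ p ∈ S') (hV : ∀ p, p ∈ V ↔ p ∈ V') (x : Int × Int) :
    pvR grid S V x ↔ pvR grid S' V' x := by
  unfold pvR
  constructor <;>
    rintro ⟨p, hp, hf, hv, hpath⟩ <;>
    refine ⟨p, by rw [hS] at *; exact hp, hf, by rw [hV] at *; exact hv, ?_⟩ <;>
    exact pvPath_mono (fun y hy => by rw [hV] at *; exact hy) hpath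

lemma pvR_cons_skip {grid : List (List String)} {t : Int × Int} {S V : List (Int × Int)}
    (h : t ∈ V ∨ ¬ pvForest grid t) (x : Int × Int) :
    pvR grid (t :: S) V x ↔ pvR grid S V x := by
  unfold pvR
  constructor
  · rintro ⟨p, hp, hf, hv, hpath⟩
    rcases List.mem_cons.1 hp with rfl | hp'
    · rcases h with h | h
      · exact absurd h hv
      · exact absurd hf h
    · exact ⟨p, hp', hf, hv, hpath⟩
  · rintro ⟨p, hp, hf, hv, hpath⟩
    exact ⟨p, List.mem_cons_of_mem _ hp, hf, hv, hpath⟩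

/-- The crux: popping a fresh Forest cell `t`, marking it and pushing its neighbours. -/
lemma pvR_cons_forest {grid : List (List String)} {t : Int × Int} {S V N V' : List (Int × Int)}
    (ht : pvForest grid t) (htV : t ∉ V)
    (hN1 : ∀ y, pvAdj t y → pvForest grid y → y ∈ N)
    (hN2 : ∀ y ∈ N, pvAdj t y)
    (hV' : ∀ y, y ∈ V' ↔ y ∈ V ∨ y = t) (x : Int × Int) :
    pvR grid (t :: S) V x ↔ x = t ∨ pvR grid (N ++ S) V' x := by
  constructor
  · rintro ⟨p, hp, hf, hv, hpath⟩
    have hp' : p = t ∨ p ∈ S := List.mem_cons.1 hp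
    induction hpath with
    | refl =>
        by_cases hpt : p = t
        · exact Or.inl hpt
        · rcases hp' with rfl | hpS
          · exact Or.inl rfl
          · refine Or.inr ⟨p, List.mem_append_right _ hpS, hf, ?_, Relation.ReflTransGen.refl⟩
            rw [hV']; push Not; exact ⟨hv, hpt⟩
    | @tail b x hpb st ih =>
        by_cases hxt : x = t
        · exact Or.inl hxt
        · right
          have hxV' : x ∉ V' := by rw [hV']; push Not; exact ⟨st.2.2, hxt⟩
          rcases ih with rfl | ⟨p', hp'', hf', hv', path'⟩
          · exact ⟨x, List.mem_append_left _ (hN1 x st.1 st.2.1), st.2.1, hxV',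
              Relation.ReflTransGen.refl⟩
          · exact ⟨p', hp'', hf', hv', path'.tail ⟨st.1, st.2.1, hxV'⟩⟩
  · rintro (rfl | ⟨p, hp, hf, hv, hpath⟩)
    · exact ⟨x, List.mem_cons_self, ht, htV, Relation.ReflTransGen.refl⟩
    · have hvV : p ∉ V := fun h => hv ((hV' p).2 (Or.inl h))
      have hpath' : pvPath grid V p x :=
        pvPath_mono (fun y hy => (hV' y).2 (Or.inl hy)) hpath
      rcases List.mem_append.1 hp with hpN | hpS
      · exact ⟨t, List.mem_cons_self, ht, htV,
          Relation.ReflTransGen.head ⟨hN2 p hpN, hf, hvV⟩ hpath'⟩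
      · exact ⟨p, List.mem_cons_of_mem _ hpS, hf, hvV, hpath'⟩



/-! The cell enumeration and the fuel measure for A's DFS. -/

def pvCells (grid : List (List String)) : List (Int × Int) :=
  (PySem.List.pyRange 0 (grid.length : Int) 1).flatMap (fun r =>
    (PySem.List.pyRange 0 ((grid.headD []).length : Int) 1).map (fun c => (r, c)))

lemma mem_pvCells {grid : List (List String)} {p : Int × Int} :
    p ∈ pvCells grid ↔ pvInb grid p := by
  simp only [pvCells, List.mem_flatMap, List.mem_map, PySem.List.mem_pyRange_one, pvInb]
  constructor
  · rintro ⟨r, ⟨h1, h2⟩, c, ⟨h3, h4⟩, rfl⟩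
    exact ⟨h1, h2, h3, h4⟩
  · rintro ⟨h1, h2, h3, h4⟩
    exact ⟨p.1, ⟨h1, h2⟩, p.2, ⟨h3, h4⟩, rfl⟩

lemma length_pvCells (grid : List (List String)) :
    (pvCells grid).length = (grid.length : Int).toNat * ((grid.headD []).length : Int).toNat := by
  simp [pvCells, List.length_flatMap, PySem.List.length_pyRange_one]

def pvFree (grid : List (List String)) (vis : List (Int × Int)) : Nat :=
  (pvCells grid).countP (fun p => pvForestb grid p && !(vis.contains p))

lemma countP_lt_countP {α : Type} (l : List α) (f g : α → Bool)
    (hfg : ∀ x ∈ l, f x = true → g x = true)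
    (x : α) (hx : x ∈ l) (hgx : g x = true) (hfx : f x = false) :
    l.countP f < l.countP g := by
  induction l with
  | nil => cases hx
  | cons a l ih =>
      rcases List.mem_cons.1 hx with rfl | hx'
      · rw [List.countP_cons, List.countP_cons, hgx, hfx]
        simp only [if_true, Bool.false_eq_true, if_false, add_zero]
        have := List.countP_mono_left (l := l) (p := f) (q := g)
          (fun y hy => hfg y (List.mem_cons_of_mem _ hy))
        omega
      · rw [List.countP_cons, List.countP_cons]
        have h1 := ih (fun y hy h => hfg y (List.mem_cons_of_mem _ hy) h) hx'
        have h2 : (if f a then 1 else 0) ≤ (if g a then 1 else 0) := by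
          split_ifs with h3 h4
          · omega
          · exact absurd (hfg a List.mem_cons_self h3) (by simp [h4])
          · omega
          · omega
        omega

lemma pvFree_add_lt {grid : List (List String)} {vis : List (Int × Int)} {t : Int × Int}
    (ht : pvForest grid t) (htV : t ∉ vis) :
    pvFree grid (PySem.Set.add vis t) < pvFree grid vis := by
  apply countP_lt_countP
  · intro x _ hx
    simp only [Bool.and_eq_true, Bool.not_eq_true'] at hx ⊢
    refine ⟨hx.1, ?_⟩
    have := hx.2
    simp only [List.contains_eq_mem, decide_eq_false_iff_not] at this ⊢
    intro hmem
    exact this ((PySem.Set.mem_add vis t x).2 (Or.inl hmem))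
  · exact mem_pvCells.2 ((pvForest_iff grid t).1 ht).1
  · simp only [Bool.and_eq_true, Bool.not_eq_true']
    exact ⟨ht, by simp [List.contains_eq_mem, htV]⟩
  · simp only [Bool.and_eq_true, Bool.not_eq_true', Bool.and_eq_false_iff]
    right
    simp [List.contains_eq_mem, PySem.Set.mem_add]

lemma pvFree_le (grid : List (List String)) (vis : List (Int × Int)) :
    pvFree grid vis ≤ (grid.length : Int).toNat * ((grid.headD []).length : Int).toNat := by
  calc pvFree grid vis ≤ (pvCells grid).length := List.countP_le_length
    _ = _ := length_pvCells grid

/-! The pushed stack of A's DFS: membership and length. -/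

def pvPush (grid : List (List String)) (r c : Int) (stack : List (Int × Int)) :
    List (Int × Int) :=
  [((1 : Int), (0 : Int)), (-1, 0), (0, 1), (0, -1)].foldl (fun st d =>
    if 0 ≤ r + d.1 ∧ r + d.1 < (grid.length : Int) ∧
       0 ≤ c + d.2 ∧ c + d.2 < ((grid.headD []).length : Int)
    then (r + d.1, c + d.2) :: st else st) stack

lemma foldl_consif_mem {α β : Type} (l : List β) (g : β → α) (cond : β → Prop)
    [DecidablePred cond] (st : List α) (x : α) :
    x ∈ l.foldl (fun st d => if cond d then g d :: st else st) st ↔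
      x ∈ st ∨ ∃ d ∈ l, cond d ∧ x = g d := by
  induction l generalizing st with
  | nil => simp
  | cons a l ih =>
      simp only [List.foldl_cons, ih]
      split_ifs with h <;> simp [h] <;> tauto

lemma foldl_consif_length {α β : Type} (l : List β) (g : β → α) (cond : β → Prop)
    [DecidablePred cond] (st : List α) :
    (l.foldl (fun st d => if cond d then g d :: st else st) st).length ≤
      st.length + l.length := by
  induction l generalizing st with
  | nil => simp
  | cons a l ih =>
      simp only [List.foldl_cons]
      split_ifs with h
      · have := ih (g a :: st); simp at this ⊢; omega
      · have := ih st; simp at this ⊢; omega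

lemma mem_pvPush {grid : List (List String)} {r c : Int} {stack : List (Int × Int)}
    {x : Int × Int} :
    x ∈ pvPush grid r c stack ↔ x ∈ stack ∨ (pvAdj (r, c) x ∧ pvInb grid x) := by
  rw [pvPush, foldl_consif_mem]
  constructor
  · rintro (h | ⟨d, hd, hc, rfl⟩)
    · exact Or.inl h
    · refine Or.inr ⟨?_, hc⟩
      fin_cases hd <;> simp [pvAdj, Prod.ext_iff] <;> omega
  · rintro (h | ⟨hadj, hinb⟩)
    · exact Or.inl h
    · right
      rcases hadj with h | h | h | h <;> subst h
      · exact ⟨(1, 0), by simp, by simpa [pvInb] using hinb, by simp [Prod.ext_iff] <;> omega⟩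
      · exact ⟨(-1, 0), by simp, by simpa [pvInb] using hinb, by simp [Prod.ext_iff] <;> omega⟩
      · exact ⟨(0, 1), by simp, by simpa [pvInb] using hinb, by simp [Prod.ext_iff] <;> omega⟩
      · exact ⟨(0, -1), by simp, by simpa [pvInb] using hinb, by simp [Prod.ext_iff] <;> omega⟩

lemma length_pvPush (grid : List (List String)) (r c : Int) (stack : List (Int × Int)) :
    (pvPush grid r c stack).length ≤ stack.length + 4 := by
  have := foldl_consif_length (α := Int × Int) (β := Int × Int)
    [((1 : Int), (0 : Int)), (-1, 0), (0, 1), (0, -1)]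
    (fun d => (r + d.1, c + d.2))
    (fun d => 0 ≤ r + d.1 ∧ r + d.1 < (grid.length : Int) ∧
       0 ≤ c + d.2 ∧ c + d.2 < ((grid.headD []).length : Int)) stack
  simpa [pvPush] using this

lemma inb_pvPush {grid : List (List String)} {r c : Int} {stack : List (Int × Int)}
    (h : ∀ p ∈ stack, pvInb grid p) :
    ∀ p ∈ pvPush grid r c stack, pvInb grid p := by
  intro p hp
  rcases mem_pvPush.1 hp with h' | h'
  · exact h p h'
  · exact h'.2


def pvInbb (grid : List (List String)) (p : Int × Int) : Bool :=
  decide (0 ≤ p.1) && decide (p.1 < (grid.length : Int)) && decide (0 ≤ p.2) &&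
  decide (p.2 < ((grid.headD []).length : Int))

lemma pvInbb_iff {grid : List (List String)} {p : Int × Int} :
    pvInbb grid p = true ↔ pvInb grid p := by
  simp [pvInbb, pvInb, and_assoc]

lemma mem_nbrList {r c : Int} {x : Int × Int} :
    x ∈ [(r + 1, c), (r - 1, c), (r, c + 1), (r, c - 1)] ↔ pvAdj (r, c) x := by
  simp [pvAdj]

/-- A's DFS loop computes exactly the cells the agenda reaches, both into the cluster
and into the visited set. -/
lemma pvDfs_spec (grid : List (List String)) :
    ∀ (fuel : Nat) (stack : List (Int × Int)) (vis : PySem.Set (Int × Int))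
      (cl : List (Int × Int)),
    vis.Nodup → (∀ p ∈ stack, pvInb grid p) →
    5 * pvFree grid vis + stack.length ≤ fuel →
    ((pvDfs grid "Forest" fuel stack vis cl).2.Nodup ∧
     (∀ x, x ∈ (pvDfs grid "Forest" fuel stack vis cl).2 ↔ x ∈ vis ∨ pvR grid stack vis x) ∧
     (∀ x, x ∈ (pvDfs grid "Forest" fuel stack vis cl).1 ↔ x ∈ cl ∨ pvR grid stack vis x)) := by
  intro fuel
  induction fuel with
  | zero =>
      intro stack vis cl hnd hinb hfuel
      have hst : stack = [] := by
        cases stack with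
        | nil => rfl
        | cons a l => simp only [List.length_cons] at hfuel; omega
      subst hst
      simp [pvDfs, pvR_nil, hnd]
  | succ fuel ih =>
      intro stack vis cl hnd hinb hfuel
      cases stack with
      | nil => simp [pvDfs, pvR_nil, hnd]
      | cons t st =>
        obtain ⟨r, c⟩ := t
        by_cases hcond : ((r, c) ∉ vis ∧ pvCell grid r c = "Forest")
        · have hstep : pvDfs grid "Forest" (fuel + 1) ((r, c) :: st) vis cl =
              pvDfs grid "Forest" fuel (pvPush grid r c st)
                (PySem.Set.add vis (r, c)) (cl ++ [(r, c)]) := by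
            simp only [pvDfs, pvPush, if_pos hcond]
          have htinb : pvInb grid (r, c) := hinb _ List.mem_cons_self
          have ht : pvForest grid (r, c) := (pvForest_iff grid (r, c)).2 ⟨htinb, hcond.2⟩
          have hlt := pvFree_add_lt ht hcond.1
          have hlen := length_pvPush grid r c st
          have hrec := ih (pvPush grid r c st) (PySem.Set.add vis (r, c)) (cl ++ [(r, c)])
            (PySem.Set.nodup_add vis (r, c) hnd)
            (inb_pvPush (fun p hp => hinb p (List.mem_cons_of_mem _ hp)))
            (by simp only [List.length_cons] at hfuel; omega)
          -- rewrite the reachable set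
          have hRrw : ∀ x, pvR grid (pvPush grid r c st) (PySem.Set.add vis (r, c)) x ↔
              pvR grid ([(r + 1, c), (r - 1, c), (r, c + 1), (r, c - 1)].filter
                (pvInbb grid) ++ st) (PySem.Set.add vis (r, c)) x := by
            intro x
            refine pvR_congr (fun p => ?_) (fun p => Iff.rfl) x
            rw [mem_pvPush, List.mem_append, List.mem_filter]
            constructor
            · rintro (h | ⟨hadj, hi⟩)
              · exact Or.inr h
              · exact Or.inl ⟨mem_nbrList.2 hadj, pvInbb_iff.2 hi⟩
            · rintro (⟨hmem, hi⟩ | h)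
              · exact Or.inr ⟨mem_nbrList.1 hmem, pvInbb_iff.1 hi⟩
              · exact Or.inl h
          have hcrux : ∀ x, pvR grid ((r, c) :: st) vis x ↔ x = (r, c) ∨
              pvR grid ([(r + 1, c), (r - 1, c), (r, c + 1), (r, c - 1)].filter
                (pvInbb grid) ++ st) (PySem.Set.add vis (r, c)) x := by
            intro x
            refine pvR_cons_forest ht hcond.1 (fun y hadj hfor => ?_)
              (fun y hy => mem_nbrList.1 (List.mem_of_mem_filter hy))
              (fun y => PySem.Set.mem_add vis (r, c) y) x
            exact List.mem_filter.2 ⟨mem_nbrList.2 hadj,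
              pvInbb_iff.2 ((pvForest_iff grid y).1 hfor).1⟩
          obtain ⟨h1, h2, h3⟩ := hrec
          rw [hstep]
          refine ⟨h1, fun x => ?_, fun x => ?_⟩
          · rw [h2 x, PySem.Set.mem_add, hcrux x, hRrw x]
            tauto
          · rw [h3 x, List.mem_append, List.mem_singleton, hcrux x, hRrw x]
            tauto
        · have hstep : pvDfs grid "Forest" (fuel + 1) ((r, c) :: st) vis cl =
              pvDfs grid "Forest" fuel st vis cl := by
            simp only [pvDfs, if_neg hcond]
          have hskip : (r, c) ∈ vis ∨ ¬ pvForest grid (r, c) := by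
            by_cases hv : (r, c) ∈ vis
            · exact Or.inl hv
            · refine Or.inr (fun hf => hcond ⟨hv, ((pvForest_iff grid (r, c)).1 hf).2⟩)
          have hrec := ih st vis cl hnd (fun p hp => hinb p (List.mem_cons_of_mem _ hp))
            (by simp only [List.length_cons] at hfuel; omega)
          obtain ⟨h1, h2, h3⟩ := hrec
          rw [hstep]
          exact ⟨h1, fun x => by rw [h2 x, pvR_cons_skip hskip],
            fun x => by rw [h3 x, pvR_cons_skip hskip]⟩


/-! A's outer scan: the visited set stays a union of complete clusters. -/

def pvSat (grid : List (List String)) (vis : List (Int × Int)) : Prop :=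
  ∀ x ∈ vis, ∀ y, pvReach grid x y → y ∈ vis

lemma pvR_singleton_sat {grid : List (List String)} {vis : List (Int × Int)} {p : Int × Int}
    (hsat : pvSat grid vis) (hf : pvForest grid p) (hv : p ∉ vis) :
    ∀ x, pvR grid [p] vis x ↔ pvReach grid p x := by
  intro x
  constructor
  · rintro ⟨q, hq, hqf, _, hpath⟩
    rw [List.mem_singleton] at hq; subst hq
    exact ⟨hqf, pvPath_mono (fun y hy => by cases hy) hpath⟩
  · rintro ⟨_, hpath⟩
    refine ⟨p, List.mem_singleton.2 rfl, hf, hv, ?_⟩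
    suffices h : pvPath grid vis p x ∧ x ∉ vis from h.1
    induction hpath with
    | refl => exact ⟨Relation.ReflTransGen.refl, hv⟩
    | @tail b y hpb st ih =>
        obtain ⟨hpathb, hbv⟩ := ih
        have hbf : pvForest grid b := pvReach_forest ⟨hf, hpb⟩
        have hyv : y ∉ vis := by
          intro hy
          exact hbv (hsat y hy b ⟨st.2.1,
            Relation.ReflTransGen.single ⟨pvAdj_symm st.1, hbf, fun h => (List.not_mem_nil h)⟩⟩)
        exact ⟨hpathb.tail ⟨st.1, st.2.1, hyv⟩, hyv⟩

def pvIsClassOf (grid : List (List String)) (K : List (Int × Int)) : Prop :=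
  ∃ p, pvForest grid p ∧ ∀ q, (q ∈ K ↔ pvReach grid p q)

def pvFamily (grid : List (List String)) (fam : List (List (Int × Int))) : Prop :=
  (∀ K ∈ fam, pvIsClassOf grid K) ∧ (∀ p, pvForest grid p → ∃ K ∈ fam, p ∈ K)

def pvStepA (grid : List (List String))
    (s : PySem.Set (Int × Int) × List (List (Int × Int))) (q : Int × Int) :
    PySem.Set (Int × Int) × List (List (Int × Int)) :=
  if (q.1, q.2) ∉ s.1 ∧ pvCell grid q.1 q.2 = "Forest" then
    let res := pvDfs grid "Forest"
      (5 * ((grid.length : Int).toNat * (((grid.headD []).length : Int)).toNat) + 1)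
      [(q.1, q.2)] s.1 []
    (res.2, s.2 ++ [res.1])
  else s

def pvInvA (grid : List (List String))
    (s : PySem.Set (Int × Int) × List (List (Int × Int))) : Prop :=
  s.1.Nodup ∧ (∀ x ∈ s.1, pvForest grid x) ∧ pvSat grid s.1 ∧
  (∀ K ∈ s.2, pvIsClassOf grid K) ∧ (∀ x ∈ s.1, ∃ K ∈ s.2, x ∈ K)

lemma pvStepA_inv (grid : List (List String))
    {s : PySem.Set (Int × Int) × List (List (Int × Int))} (a : Int × Int)
    (ha : pvInb grid a) (hInv : pvInvA grid s) :
    pvInvA grid (pvStepA grid s a) ∧ (pvForest grid a → a ∈ (pvStepA grid s a).1) ∧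
    (∀ x ∈ s.1, x ∈ (pvStepA grid s a).1) ∧
    (∀ K ∈ s.2, K ∈ (pvStepA grid s a).2) := by
  obtain ⟨hnd, hfor, hsat, hcls, hcov⟩ := hInv
  by_cases hcond : ((a.1, a.2) ∉ s.1 ∧ pvCell grid a.1 a.2 = "Forest")
  · have haf : pvForest grid a := (pvForest_iff grid a).2 ⟨ha, hcond.2⟩
    have hav : a ∉ s.1 := by simpa using hcond.1
    have hspec := pvDfs_spec grid
      (5 * ((grid.length : Int).toNat * (((grid.headD []).length : Int)).toNat) + 1)
      [(a.1, a.2)] s.1 [] hnd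
      (by intro p hp; rw [List.mem_singleton] at hp; subst hp; exact ha)
      (by have := pvFree_le grid s.1; simp only [List.length_singleton]; omega)
    obtain ⟨h1, h2, h3⟩ := hspec
    have hR := pvR_singleton_sat (grid := grid) hsat haf hav
    have heq : pvStepA grid s a =
        ((pvDfs grid "Forest"
          (5 * ((grid.length : Int).toNat * (((grid.headD []).length : Int)).toNat) + 1)
          [(a.1, a.2)] s.1 []).2,
         s.2 ++ [(pvDfs grid "Forest"
          (5 * ((grid.length : Int).toNat * (((grid.headD []).length : Int)).toNat) + 1)
          [(a.1, a.2)] s.1 []).1]) := by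
      simp only [pvStepA, if_pos hcond]
    have h2' : ∀ x, x ∈ (pvStepA grid s a).1 ↔ x ∈ s.1 ∨ pvReach grid a x := by
      intro x; rw [heq]
      simpa [hR x] using h2 x
    have h3' : ∀ x, x ∈ (pvDfs grid "Forest"
          (5 * ((grid.length : Int).toNat * (((grid.headD []).length : Int)).toNat) + 1)
          [(a.1, a.2)] s.1 []).1 ↔ pvReach grid a x := by
      intro x
      simpa [hR x] using h3 x
    refine ⟨⟨?_, ?_, ?_, ?_, ?_⟩, ?_, ?_, ?_⟩
    · rw [heq]; exact h1
    · intro x hx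
      rcases (h2' x).1 hx with h | h
      · exact hfor x h
      · exact pvReach_forest h
    · intro x hx y hxy
      rcases (h2' x).1 hx with h | h
      · exact (h2' y).2 (Or.inl (hsat x h y hxy))
      · exact (h2' y).2 (Or.inr (pvReach_trans h hxy))
    · intro K hK
      rw [heq] at hK
      rcases List.mem_append.1 hK with h | h
      · exact hcls K h
      · rw [List.mem_singleton] at h; subst h
        exact ⟨a, haf, fun q => h3' q⟩
    · intro x hx
      rcases (h2' x).1 hx with h | h
      · obtain ⟨K, hK, hxK⟩ := hcov x h
        exact ⟨K, by rw [heq]; exact List.mem_append_left _ hK, hxK⟩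
      · refine ⟨_, by rw [heq]; exact List.mem_append_right _ (List.mem_singleton.2 rfl), ?_⟩
        exact (h3' x).2 h
    · intro _; exact (h2' a).2 (Or.inr (pvReach_refl haf))
    · intro x hx; exact (h2' x).2 (Or.inl hx)
    · intro K hK; rw [heq]; exact List.mem_append_left _ hK
  · have heq : pvStepA grid s a = s := by simp only [pvStepA, if_neg hcond]
    rw [heq]
    refine ⟨⟨hnd, hfor, hsat, hcls, hcov⟩, ?_, fun x hx => hx, fun K hK => hK⟩
    intro haf
    by_contra hnot
    exact hcond ⟨by simpa using hnot, ((pvForest_iff grid a).1 haf).2⟩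

lemma pvFoldA (grid : List (List String)) :
    ∀ (cells : List (Int × Int)) (s : PySem.Set (Int × Int) × List (List (Int × Int))),
    (∀ p ∈ cells, pvInb grid p) → pvInvA grid s →
    pvInvA grid (cells.foldl (pvStepA grid) s) ∧
    (∀ p ∈ cells, pvForest grid p → p ∈ (cells.foldl (pvStepA grid) s).1) ∧
    (∀ x ∈ s.1, x ∈ (cells.foldl (pvStepA grid) s).1) := by
  intro cells
  induction cells with
  | nil => intro s _ hInv; exact ⟨hInv, by simp, fun x hx => hx⟩
  | cons a l ih =>
      intro s hinb hInv
      obtain ⟨hInv', hafor, hmono, _⟩ := pvStepA_inv grid a (hinb a List.mem_cons_self) hInv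
      obtain ⟨hI, hcells, hm⟩ := ih (pvStepA grid s a)
        (fun p hp => hinb p (List.mem_cons_of_mem _ hp)) hInv'
      refine ⟨hI, ?_, fun x hx => hm x (hmono x hx)⟩
      intro p hp hpf
      rcases List.mem_cons.1 hp with rfl | hp'
      · exact hm p (hafor hpf)
      · exact hcells p hp' hpf

lemma pvFamilyA (grid : List (List String)) :
    pvFamily grid ((pvCells grid).foldl (pvStepA grid) (PySem.Set.empty, [])).2 := by
  have hInit : pvInvA grid ((PySem.Set.empty : PySem.Set (Int × Int)),
      ([] : List (List (Int × Int)))) := by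
    refine ⟨List.nodup_nil, by simp [PySem.Set.empty], ?_, by simp, by simp [PySem.Set.empty]⟩
    intro x hx; cases hx
  obtain ⟨hInv, hall, _⟩ := pvFoldA grid (pvCells grid) _
    (fun p hp => mem_pvCells.1 hp) hInit
  obtain ⟨_, _, _, hcls, hcov⟩ := hInv
  refine ⟨hcls, ?_⟩
  intro p hpf
  exact hcov p (hall p (mem_pvCells.2 ((pvForest_iff grid p).1 hpf).1) hpf)


/-! Phase 2: mountains adjacent to a cluster, and the final union — characterised by
membership only, so that the two ports' different cluster families agree. -/

def pvMnt (grid : List (List String)) (K : List (Int × Int)) (x : Int × Int) : Prop :=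
  (∃ p ∈ K, pvAdj p x) ∧ pvInb grid x ∧ pvCell grid x.1 x.2 = "Mountain"

def pvTwo (grid : List (List String)) (K : List (Int × Int)) : Prop :=
  ∃ x y, x ≠ y ∧ pvMnt grid K x ∧ pvMnt grid K y

def pvMntC (grid : List (List String)) (p x : Int × Int) : Prop :=
  (∃ q, pvReach grid p q ∧ pvAdj q x) ∧ pvInb grid x ∧ pvCell grid x.1 x.2 = "Mountain"

def pvTwoC (grid : List (List String)) (p : Int × Int) : Prop :=
  ∃ x y, x ≠ y ∧ pvMntC grid p x ∧ pvMntC grid p y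

lemma pvMnt_class {grid : List (List String)} {K : List (Int × Int)} {p : Int × Int}
    (hK : ∀ q, q ∈ K ↔ pvReach grid p q) (x : Int × Int) :
    pvMnt grid K x ↔ pvMntC grid p x := by
  unfold pvMnt pvMntC
  constructor
  · rintro ⟨⟨q, hq, hadj⟩, h2, h3⟩
    exact ⟨⟨q, (hK q).1 hq, hadj⟩, h2, h3⟩
  · rintro ⟨⟨q, hq, hadj⟩, h2, h3⟩
    exact ⟨⟨q, (hK q).2 hq, hadj⟩, h2, h3⟩

lemma pvTwo_class {grid : List (List String)} {K : List (Int × Int)} {p : Int × Int}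
    (hK : ∀ q, q ∈ K ↔ pvReach grid p q) :
    pvTwo grid K ↔ pvTwoC grid p := by
  unfold pvTwo pvTwoC
  constructor
  · rintro ⟨x, y, hxy, h1, h2⟩
    exact ⟨x, y, hxy, (pvMnt_class hK x).mp h1, (pvMnt_class hK y).mp h2⟩
  · rintro ⟨x, y, hxy, h1, h2⟩
    exact ⟨x, y, hxy, (pvMnt_class hK x).mpr h1, (pvMnt_class hK y).mpr h2⟩

lemma pvMntC_of_reach {grid : List (List String)} {p p0 : Int × Int}
    (h : pvReach grid p0 p) (x : Int × Int) : (pvMntC grid p x ↔ pvMntC grid p0 x) := by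
  unfold pvMntC
  constructor <;> rintro ⟨⟨q, hq, hadj⟩, h2, h3⟩
  · exact ⟨⟨q, pvReach_trans h hq, hadj⟩, h2, h3⟩
  · exact ⟨⟨q, pvReach_trans (pvReach_symm h) hq, hadj⟩, h2, h3⟩

lemma pvFamily_char {grid : List (List String)} {fam : List (List (Int × Int))}
    (hfam : pvFamily grid fam) (x : Int × Int) :
    (∃ K ∈ fam, pvTwo grid K ∧ pvMnt grid K x) ↔
    (∃ p, pvForest grid p ∧ pvTwoC grid p ∧ pvMntC grid p x) := by
  constructor
  · rintro ⟨K, hK, htwo, hmnt⟩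
    obtain ⟨p, hpf, hKp⟩ := hfam.1 K hK
    exact ⟨p, hpf, (pvTwo_class hKp).1 htwo, (pvMnt_class hKp x).1 hmnt⟩
  · rintro ⟨p, hpf, htwo, hmnt⟩
    obtain ⟨K, hK, hpK⟩ := hfam.2 p hpf
    obtain ⟨p0, hp0f, hKp0⟩ := hfam.1 K hK
    have hr : pvReach grid p0 p := (hKp0 p).1 hpK
    have hmq : ∀ y, pvMntC grid p y ↔ pvMntC grid p0 y := fun y => pvMntC_of_reach hr y
    refine ⟨K, hK, (pvTwo_class hKp0).2 ?_, (pvMnt_class hKp0 x).2 ((hmq x).1 hmnt)⟩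
    obtain ⟨a, b, hab, h1, h2⟩ := htwo
    exact ⟨a, b, hab, (hmq a).1 h1, (hmq b).1 h2⟩

lemma nodup_two_iff {α : Type} (l : List α) (hl : l.Nodup) :
    2 ≤ l.length ↔ ∃ a b : α, a ≠ b ∧ a ∈ l ∧ b ∈ l := by
  match l with
  | [] => simp
  | [a] =>
      simp only [List.length_singleton, List.mem_singleton]
      constructor
      · omega
      · rintro ⟨x, y, hxy, rfl, rfl⟩; exact absurd rfl hxy
  | a :: b :: t =>
      simp only [List.length_cons]
      constructor
      · intro _
        refine ⟨a, b, ?_, List.mem_cons_self, List.mem_cons_of_mem _ List.mem_cons_self⟩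
        intro h; subst h
        exact (List.nodup_cons.1 hl).1 List.mem_cons_self
      · intro _; omega

/-- Generic: a fold over candidate neighbour cells adding the Mountain ones to a set. -/
lemma pvAddMounts_mem (ns : List (Int × Int))
    (cond : Int × Int → Prop) [DecidablePred cond] :
    ∀ (m : PySem.Set (Int × Int)), m.Nodup →
    ((ns.foldl (fun m q => if cond q then PySem.Set.add m q else m) m).Nodup ∧
     (∀ x, x ∈ ns.foldl (fun m q => if cond q then PySem.Set.add m q else m) m ↔
        x ∈ m ∨ ∃ q ∈ ns, x = q ∧ cond q)) := by
  induction ns with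
  | nil => intro m hm; exact ⟨hm, fun x => by simp⟩
  | cons a l ih =>
      intro m hm
      simp only [List.foldl_cons]
      by_cases hc : cond a
      · rw [if_pos hc]
        obtain ⟨h1, h2⟩ := ih (PySem.Set.add m a) (PySem.Set.nodup_add m a hm)
        refine ⟨h1, fun x => ?_⟩
        rw [h2 x, PySem.Set.mem_add]
        constructor
        · rintro ((h | rfl) | ⟨q, hq, rfl, hcq⟩)
          · exact Or.inl h
          · exact Or.inr ⟨x, List.mem_cons_self, rfl, hc⟩
          · exact Or.inr ⟨x, List.mem_cons_of_mem _ hq, rfl, hcq⟩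
        · rintro (h | ⟨q, hq, rfl, hcq⟩)
          · exact Or.inl (Or.inl h)
          · rcases List.mem_cons.1 hq with heq | hq'
            · subst heq; exact Or.inl (Or.inr rfl)
            · exact Or.inr ⟨x, hq', rfl, hcq⟩
      · rw [if_neg hc]
        obtain ⟨h1, h2⟩ := ih m hm
        refine ⟨h1, fun x => ?_⟩
        rw [h2 x]
        constructor
        · rintro (h | ⟨q, hq, rfl, hcq⟩)
          · exact Or.inl h
          · exact Or.inr ⟨x, List.mem_cons_of_mem _ hq, rfl, hcq⟩
        · rintro (h | ⟨q, hq, rfl, hcq⟩)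
          · exact Or.inl h
          · rcases List.mem_cons.1 hq with heq | hq'
            · subst heq; exact absurd hcq hc
            · exact Or.inr ⟨x, hq', rfl, hcq⟩


lemma pv_ite_ite_and {α : Type} (P Q : Prop) [Decidable P] [Decidable Q] (a b : α) :
    (if P then (if Q then a else b) else b) = if P ∧ Q then a else b := by
  split_ifs <;> tauto

/-- A's per-cluster Mountain set (the inner fold of A's phase 2, verbatim). -/
def pvMountsA (grid : List (List String)) (cluster : List (Int × Int)) :
    PySem.Set (Int × Int) :=
  cluster.foldl (fun m p =>
    [((1 : Int), (0 : Int)), (-1, 0), (0, 1), (0, -1)].foldl (fun m d =>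
      if 0 ≤ p.1 + d.1 ∧ p.1 + d.1 < (grid.length : Int) ∧
         0 ≤ p.2 + d.2 ∧ p.2 + d.2 < ((grid.headD []).length : Int) then
        if pvCell grid (p.1 + d.1) (p.2 + d.2) = "Mountain" then
          PySem.Set.add m (p.1 + d.1, p.2 + d.2)
        else m
      else m) m) PySem.Set.empty

/-- B's per-cluster Mountain set (the inner fold of B's phase 2, verbatim,
with B's cols already rewritten to A's form). -/
def pvMountsB (grid : List (List String)) (cluster : List (Int × Int)) :
    PySem.Set (Int × Int) :=
  cluster.foldl (fun m p =>
    [((p.1 + 1 : Int), (p.2 : Int)), (p.1 - 1, p.2), (p.1, p.2 + 1), (p.1, p.2 - 1)].foldl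
      (fun m q =>
        if (0 ≤ q.1 ∧ q.1 < (grid.length : Int) ∧
            0 ≤ q.2 ∧ q.2 < ((grid.headD []).length : Int)) ∧
           pvCell grid q.1 q.2 = "Mountain"
        then PySem.Set.add m q else m) m) PySem.Set.empty

lemma pvNbr_cases {grid : List (List String)} {p x : Int × Int} :
    (∃ q ∈ [(p.1 + 1, p.2), (p.1 - 1, p.2), (p.1, p.2 + 1), (p.1, p.2 - 1)],
       x = q ∧ (0 ≤ q.1 ∧ q.1 < (grid.length : Int) ∧
          0 ≤ q.2 ∧ q.2 < ((grid.headD []).length : Int)) ∧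
       pvCell grid q.1 q.2 = "Mountain") ↔
    (pvAdj p x ∧ pvInb grid x ∧ pvCell grid x.1 x.2 = "Mountain") := by
  constructor
  · rintro ⟨q, hq, rfl, hb, hM⟩
    refine ⟨mem_nbrList.1 (by exact hq), ?_, hM⟩
    exact ⟨hb.1, hb.2.1, hb.2.2.1, hb.2.2.2⟩
  · rintro ⟨hadj, hinb, hM⟩
    exact ⟨x, mem_nbrList.2 (by exact hadj), rfl,
      ⟨hinb.1, hinb.2.1, hinb.2.2.1, hinb.2.2.2⟩, hM⟩

lemma pvMountsB_spec (grid : List (List String)) (K : List (Int × Int)) :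
    (pvMountsB grid K).Nodup ∧ (∀ x, x ∈ pvMountsB grid K ↔ pvMnt grid K x) := by
  suffices h : ∀ (L : List (Int × Int)) (m : PySem.Set (Int × Int)), m.Nodup →
      ((L.foldl (fun m p =>
        [((p.1 + 1 : Int), (p.2 : Int)), (p.1 - 1, p.2), (p.1, p.2 + 1), (p.1, p.2 - 1)].foldl
          (fun m q =>
            if (0 ≤ q.1 ∧ q.1 < (grid.length : Int) ∧
                0 ≤ q.2 ∧ q.2 < ((grid.headD []).length : Int)) ∧
               pvCell grid q.1 q.2 = "Mountain"
            then PySem.Set.add m q else m) m) m).Nodup ∧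
       (∀ x, x ∈ L.foldl (fun m p =>
        [((p.1 + 1 : Int), (p.2 : Int)), (p.1 - 1, p.2), (p.1, p.2 + 1), (p.1, p.2 - 1)].foldl
          (fun m q =>
            if (0 ≤ q.1 ∧ q.1 < (grid.length : Int) ∧
                0 ≤ q.2 ∧ q.2 < ((grid.headD []).length : Int)) ∧
               pvCell grid q.1 q.2 = "Mountain"
            then PySem.Set.add m q else m) m) m ↔
          x ∈ m ∨ ∃ p ∈ L, pvAdj p x ∧ pvInb grid x ∧ pvCell grid x.1 x.2 = "Mountain")) by
    obtain ⟨h1, h2⟩ := h K PySem.Set.empty List.nodup_nil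
    refine ⟨h1, fun x => ?_⟩
    rw [pvMountsB, h2 x]
    simp only [PySem.Set.empty, List.not_mem_nil, false_or]
    unfold pvMnt
    constructor
    · rintro ⟨p, hp, h1', h2', h3'⟩; exact ⟨⟨p, hp, h1'⟩, h2', h3'⟩
    · rintro ⟨⟨p, hp, h1'⟩, h2', h3'⟩; exact ⟨p, hp, h1', h2', h3'⟩
  intro L
  induction L with
  | nil => intro m hm; simp [hm]
  | cons p L ih =>
      intro m hm
      rw [List.foldl_cons]
      obtain ⟨hnd', hmem'⟩ := pvAddMounts_mem
        [((p.1 + 1 : Int), (p.2 : Int)), (p.1 - 1, p.2), (p.1, p.2 + 1), (p.1, p.2 - 1)]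
        (fun q => (0 ≤ q.1 ∧ q.1 < (grid.length : Int) ∧
            0 ≤ q.2 ∧ q.2 < ((grid.headD []).length : Int)) ∧
           pvCell grid q.1 q.2 = "Mountain") m hm
      obtain ⟨h1, h2⟩ := ih _ hnd'
      refine ⟨h1, fun x => ?_⟩
      rw [h2 x, hmem' x, pvNbr_cases]
      constructor
      · rintro ((h | h) | ⟨q, hq, hrest⟩)
        · exact Or.inl h
        · exact Or.inr ⟨p, List.mem_cons_self, h⟩
        · exact Or.inr ⟨q, List.mem_cons_of_mem _ hq, hrest⟩
      · rintro (h | ⟨q, hq, hrest⟩)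
        · exact Or.inl (Or.inl h)
        · rcases List.mem_cons.1 hq with heq | hq'
          · subst heq; exact Or.inl (Or.inr hrest)
          · exact Or.inr ⟨q, hq', hrest⟩

lemma pvMountsA_eq_B (grid : List (List String)) (K : List (Int × Int)) :
    pvMountsA grid K = pvMountsB grid K := by
  unfold pvMountsA pvMountsB
  congr 1
  funext m p
  rw [show [((1 : Int), (0 : Int)), (-1, 0), (0, 1), (0, -1)].foldl (fun m d =>
      if 0 ≤ p.1 + d.1 ∧ p.1 + d.1 < (grid.length : Int) ∧
         0 ≤ p.2 + d.2 ∧ p.2 + d.2 < ((grid.headD []).length : Int) then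
        if pvCell grid (p.1 + d.1) (p.2 + d.2) = "Mountain" then
          PySem.Set.add m (p.1 + d.1, p.2 + d.2)
        else m
      else m) m =
    [((1 : Int), (0 : Int)), (-1, 0), (0, 1), (0, -1)].foldl (fun m d =>
      if (0 ≤ p.1 + d.1 ∧ p.1 + d.1 < (grid.length : Int) ∧
         0 ≤ p.2 + d.2 ∧ p.2 + d.2 < ((grid.headD []).length : Int)) ∧
        pvCell grid (p.1 + d.1) (p.2 + d.2) = "Mountain" then
          PySem.Set.add m (p.1 + d.1, p.2 + d.2) else m) m from by
      simp only [List.foldl_cons, List.foldl_nil, pv_ite_ite_and]]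
  simp only [List.foldl_cons, List.foldl_nil]
  norm_num [← sub_eq_add_neg]

/-- The final union over a cluster family, generic in the per-cluster Mountain set. -/
lemma pvTotal_spec (grid : List (List String))
    (mounts : List (Int × Int) → PySem.Set (Int × Int))
    (hnd : ∀ K, (mounts K).Nodup) (hmem : ∀ K x, x ∈ mounts K ↔ pvMnt grid K x) :
    ∀ (fam : List (List (Int × Int))) (t0 : PySem.Set (Int × Int)), t0.Nodup →
    ((fam.foldl (fun tot K => if 2 ≤ PySem.Set.len (mounts K) then
        PySem.Set.union tot (mounts K) else tot) t0).Nodup ∧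
     (∀ x, x ∈ fam.foldl (fun tot K => if 2 ≤ PySem.Set.len (mounts K) then
        PySem.Set.union tot (mounts K) else tot) t0 ↔
        x ∈ t0 ∨ ∃ K ∈ fam, pvTwo grid K ∧ pvMnt grid K x)) := by
  intro fam
  induction fam with
  | nil => intro t0 h0; simp [h0]
  | cons K fam ih =>
      intro t0 h0
      simp only [List.foldl_cons]
      have hbig : (2 ≤ PySem.Set.len (mounts K)) ↔ pvTwo grid K := by
        rw [PySem.Set.len]
        rw [show ((2 : Int) ≤ ((mounts K).length : Int)) ↔ 2 ≤ (mounts K).length from by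
          exact_mod_cast Iff.rfl]
        rw [nodup_two_iff _ (hnd K)]
        unfold pvTwo
        constructor <;> rintro ⟨a, b, hab, h1, h2⟩ <;>
          exact ⟨a, b, hab, by rw [← hmem] at * <;> assumption,
            by rw [← hmem] at * <;> assumption⟩
      by_cases hc : 2 ≤ PySem.Set.len (mounts K)
      · rw [if_pos hc]
        obtain ⟨h1, h2⟩ := ih (PySem.Set.union t0 (mounts K))
          (PySem.Set.nodup_union t0 (mounts K) h0)
        refine ⟨h1, fun x => ?_⟩
        rw [h2 x, PySem.Set.mem_union]
        constructor
        · rintro ((h | h) | ⟨K', hK', hrest⟩)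
          · exact Or.inl h
          · exact Or.inr ⟨K, List.mem_cons_self, hbig.1 hc, (hmem K x).1 h⟩
          · exact Or.inr ⟨K', List.mem_cons_of_mem _ hK', hrest⟩
        · rintro (h | ⟨K', hK', htwo, hmnt⟩)
          · exact Or.inl (Or.inl h)
          · rcases List.mem_cons.1 hK' with heq | hK''
            · subst heq; exact Or.inl (Or.inr ((hmem K' x).2 hmnt))
            · exact Or.inr ⟨K', hK'', htwo, hmnt⟩
      · rw [if_neg hc]
        obtain ⟨h1, h2⟩ := ih t0 h0
        refine ⟨h1, fun x => ?_⟩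
        rw [h2 x]
        constructor
        · rintro (h | ⟨K', hK', hrest⟩)
          · exact Or.inl h
          · exact Or.inr ⟨K', List.mem_cons_of_mem _ hK', hrest⟩
        · rintro (h | ⟨K', hK', htwo, hmnt⟩)
          · exact Or.inl h
          · rcases List.mem_cons.1 hK' with heq | hK''
            · subst heq; exact absurd (hbig.2 htwo) hc
            · exact Or.inr ⟨K', hK'', htwo, hmnt⟩


lemma pvMountsA_spec (grid : List (List String)) (K : List (Int × Int)) :
    (pvMountsA grid K).Nodup ∧ (∀ x, x ∈ pvMountsA grid K ↔ pvMnt grid K x) := by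
  rw [pvMountsA_eq_B]; exact pvMountsB_spec grid K

lemma pvPhase1A_eq (grid : List (List String)) :
    ((PySem.List.pyRange 0 (grid.length : Int) 1).foldl (fun s r =>
      (PySem.List.pyRange 0 ((grid.headD []).length : Int) 1).foldl (fun s c =>
        if (r, c) ∉ s.1 ∧ pvCell grid r c = "Forest" then
          let res := pvDfs grid "Forest"
            (5 * ((grid.length : Int).toNat * ((grid.headD []).length : Int).toNat) + 1)
            [(r, c)] s.1 []
          (res.2, s.2 ++ [res.1])
        else s) s)
      ((PySem.Set.empty : PySem.Set (Int × Int)), ([] : List (List (Int × Int))))) =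
    (pvCells grid).foldl (pvStepA grid)
      ((PySem.Set.empty : PySem.Set (Int × Int)), ([] : List (List (Int × Int)))) := by
  rw [pvCells, List.foldl_flatMap]
  simp only [List.foldl_map]
  rfl

/-- A's result, characterised purely by the connectivity predicates. -/
lemma stonesideA_char (grid : List (List String)) :
    ∃ tot : PySem.Set (Int × Int),
      stoneside_progress grid = (PySem.Set.len tot : Int) * 3 ∧ tot.Nodup ∧
      (∀ x, x ∈ tot ↔ ∃ p, pvForest grid p ∧ pvTwoC grid p ∧ pvMntC grid p x) := by
  have h0 : stoneside_progress grid =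
      (PySem.Set.len
        ((((PySem.List.pyRange 0 (grid.length : Int) 1).foldl (fun s r =>
          (PySem.List.pyRange 0 ((grid.headD []).length : Int) 1).foldl (fun s c =>
            if (r, c) ∉ s.1 ∧ pvCell grid r c = "Forest" then
              let res := pvDfs grid "Forest"
                (5 * ((grid.length : Int).toNat * ((grid.headD []).length : Int).toNat) + 1)
                [(r, c)] s.1 []
              (res.2, s.2 ++ [res.1])
            else s) s)
          ((PySem.Set.empty : PySem.Set (Int × Int)), ([] : List (List (Int × Int))))).2).foldl
          (fun tot K => if 2 ≤ PySem.Set.len (pvMountsA grid K) then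
            PySem.Set.union tot (pvMountsA grid K) else tot) PySem.Set.empty) : Int) * 3 := rfl
  rw [pvPhase1A_eq] at h0
  set fam := ((pvCells grid).foldl (pvStepA grid)
      ((PySem.Set.empty : PySem.Set (Int × Int)), ([] : List (List (Int × Int))))).2 with hfam
  have hfamily : pvFamily grid fam := pvFamilyA grid
  obtain ⟨hnd, hmem⟩ := pvTotal_spec grid (pvMountsA grid)
    (fun K => (pvMountsA_spec grid K).1) (fun K x => (pvMountsA_spec grid K).2 x)
    fam PySem.Set.empty List.nodup_nil
  refine ⟨_, h0, hnd, fun x => ?_⟩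
  rw [hmem x]
  simp only [PySem.Set.empty, List.not_mem_nil, false_or]
  exact pvFamily_char hfamily x


/-! B's side: merging classes along right/down edges.  `pvJoin E p q` is the equivalence
obtained from `E` by identifying the classes of `p` and `q`. -/

def pvE0 (grid : List (List String)) (a b : Int × Int) : Prop := a = b ∧ pvForest grid a

def pvJoin (E : (Int × Int) → (Int × Int) → Prop) (p q : Int × Int) (a b : Int × Int) : Prop :=
  E a b ∨ (E a p ∧ E q b) ∨ (E a q ∧ E p b)

def pvAddE (grid : List (List String)) (E : (Int × Int) → (Int × Int) → Prop)
    (e : (Int × Int) × (Int × Int)) : (Int × Int) → (Int × Int) → Prop :=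
  if pvForestb grid e.1 && pvForestb grid e.2 then pvJoin E e.1 e.2 else E

def pvExtend (grid : List (List String)) (E : (Int × Int) → (Int × Int) → Prop)
    (es : List ((Int × Int) × (Int × Int))) : (Int × Int) → (Int × Int) → Prop :=
  es.foldl (pvAddE grid) E

def pvPER (grid : List (List String)) (E : (Int × Int) → (Int × Int) → Prop) : Prop :=
  (∀ a, pvForest grid a → E a a) ∧ (∀ a b, E a b → E b a) ∧
  (∀ a b c, E a b → E b c → E a c) ∧ (∀ a b, E a b → pvForest grid a ∧ pvForest grid b)

lemma pvPER_E0 (grid : List (List String)) : pvPER grid (pvE0 grid) := by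
  refine ⟨fun a ha => ⟨rfl, ha⟩, ?_, ?_, ?_⟩
  · rintro a b ⟨rfl, h⟩; exact ⟨rfl, h⟩
  · rintro a b c ⟨rfl, h⟩ ⟨rfl, _⟩; exact ⟨rfl, h⟩
  · rintro a b ⟨rfl, h⟩; exact ⟨h, h⟩

lemma pvAddE_le (grid : List (List String)) (E : (Int × Int) → (Int × Int) → Prop)
    (e : (Int × Int) × (Int × Int)) {a b : Int × Int} (h : E a b) : pvAddE grid E e a b := by
  unfold pvAddE; split_ifs
  · exact Or.inl h
  · exact h

lemma pvExtend_le (grid : List (List String)) (E : (Int × Int) → (Int × Int) → Prop)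
    (es : List ((Int × Int) × (Int × Int))) {a b : Int × Int} (h : E a b) :
    pvExtend grid E es a b := by
  induction es generalizing E with
  | nil => exact h
  | cons e es ih => exact ih (pvAddE grid E e) (pvAddE_le grid E e h)

lemma pvPER_join {grid : List (List String)} {E : (Int × Int) → (Int × Int) → Prop}
    (hE : pvPER grid E) {p q : Int × Int} (hp : pvForest grid p) (hq : pvForest grid q) :
    pvPER grid (pvJoin E p q) := by
  obtain ⟨hrefl, hsymm, htrans, hsupp⟩ := hE
  refine ⟨fun a ha => Or.inl (hrefl a ha), ?_, ?_, ?_⟩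
  · rintro a b (h | ⟨h1, h2⟩ | ⟨h1, h2⟩)
    · exact Or.inl (hsymm _ _ h)
    · exact Or.inr (Or.inr ⟨hsymm _ _ h2, hsymm _ _ h1⟩)
    · exact Or.inr (Or.inl ⟨hsymm _ _ h2, hsymm _ _ h1⟩)
  · rintro a b c (h | ⟨h1, h2⟩ | ⟨h1, h2⟩) (h' | ⟨h1', h2'⟩ | ⟨h1', h2'⟩)
    · exact Or.inl (htrans _ _ _ h h')
    · exact Or.inr (Or.inl ⟨htrans _ _ _ h h1', h2'⟩)
    · exact Or.inr (Or.inr ⟨htrans _ _ _ h h1', h2'⟩)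
    · exact Or.inr (Or.inl ⟨h1, htrans _ _ _ h2 h'⟩)
    · exact Or.inl (htrans _ _ _
        (htrans _ _ _ h1 (hsymm _ _ (htrans _ _ _ h2 h1'))) h2')
    · exact Or.inl (htrans _ _ _ h1 h2')
    · exact Or.inr (Or.inr ⟨h1, htrans _ _ _ h2 h'⟩)
    · exact Or.inl (htrans _ _ _ h1 h2')
    · exact Or.inl (htrans _ _ _
        (htrans _ _ _ h1 (hsymm _ _ (htrans _ _ _ h2 h1'))) h2')
  · rintro a b (h | ⟨h1, h2⟩ | ⟨h1, h2⟩)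
    · exact hsupp _ _ h
    · exact ⟨(hsupp _ _ h1).1, (hsupp _ _ h2).2⟩
    · exact ⟨(hsupp _ _ h1).1, (hsupp _ _ h2).2⟩

lemma pvPER_addE {grid : List (List String)} {E : (Int × Int) → (Int × Int) → Prop}
    (hE : pvPER grid E) (e : (Int × Int) × (Int × Int)) : pvPER grid (pvAddE grid E e) := by
  unfold pvAddE; split_ifs with h
  · simp only [Bool.and_eq_true] at h
    exact pvPER_join hE h.1 h.2
  · exact hE

lemma pvPER_extend {grid : List (List String)} {E : (Int × Int) → (Int × Int) → Prop}
    (hE : pvPER grid E) (es : List ((Int × Int) × (Int × Int))) :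
    pvPER grid (pvExtend grid E es) := by
  induction es generalizing E with
  | nil => exact hE
  | cons e es ih => exact ih (pvPER_addE hE e)

lemma pvExtend_edge {grid : List (List String)} {E : (Int × Int) → (Int × Int) → Prop}
    (hE : pvPER grid E) {es : List ((Int × Int) × (Int × Int))}
    {e : (Int × Int) × (Int × Int)} (he : e ∈ es)
    (h1 : pvForest grid e.1) (h2 : pvForest grid e.2) :
    pvExtend grid E es e.1 e.2 := by
  induction es generalizing E with
  | nil => cases he
  | cons e' es ih =>
      rcases List.mem_cons.1 he with rfl | he'
      · refine pvExtend_le grid _ es ?_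
        unfold pvAddE
        rw [if_pos (by simp [pvForest] at h1 h2 ⊢; exact ⟨h1, h2⟩)]
        exact Or.inr (Or.inl ⟨hE.1 _ h1, hE.1 _ h2⟩)
      · exact ih (pvPER_addE hE e') he'

def pvEdges (grid : List (List String)) : List ((Int × Int) × (Int × Int)) :=
  (pvCells grid).flatMap (fun q => [(q, (q.1 + 1, q.2)), (q, (q.1, q.2 + 1))])

lemma pvEdges_adj {grid : List (List String)} {e : (Int × Int) × (Int × Int)}
    (he : e ∈ pvEdges grid) : pvAdj e.1 e.2 := by
  simp only [pvEdges, List.mem_flatMap] at he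
  obtain ⟨q, _, hq⟩ := he
  simp only [List.mem_cons, List.not_mem_nil, or_false, List.mem_singleton] at hq
  rcases hq with rfl | rfl <;> simp [pvAdj]

lemma pvEdges_mem_right {grid : List (List String)} {x : Int × Int}
    (hx : pvInb grid x) : (x, (x.1 + 1, x.2)) ∈ pvEdges grid ∧
      (x, (x.1, x.2 + 1)) ∈ pvEdges grid := by
  constructor <;>
    · simp only [pvEdges, List.mem_flatMap]
      exact ⟨x, mem_pvCells.2 hx, by simp⟩

def pvEA (grid : List (List String)) : (Int × Int) → (Int × Int) → Prop :=
  pvExtend grid (pvE0 grid) (pvEdges grid)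

lemma pvExtend_le_reach {grid : List (List String)}
    {E : (Int × Int) → (Int × Int) → Prop} (hE : ∀ a b, E a b → pvReach grid a b)
    {es : List ((Int × Int) × (Int × Int))} (hadj : ∀ e ∈ es, pvAdj e.1 e.2) :
    ∀ a b, pvExtend grid E es a b → pvReach grid a b := by
  induction es generalizing E with
  | nil => exact hE
  | cons e es ih =>
      refine ih ?_ (fun e' he' => hadj e' (List.mem_cons_of_mem _ he'))
      intro a b hab
      unfold pvAddE at hab
      split_ifs at hab with hfor
      · simp only [Bool.and_eq_true] at hfor
        have hf1 : pvForest grid e.1 := hfor.1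
        have hf2 : pvForest grid e.2 := hfor.2
        have hstep : pvReach grid e.1 e.2 :=
          ⟨hf1, Relation.ReflTransGen.single ⟨hadj e List.mem_cons_self, hf2,
            List.not_mem_nil⟩⟩
        rcases hab with h | ⟨h1, h2⟩ | ⟨h1, h2⟩
        · exact hE _ _ h
        · exact pvReach_trans (hE _ _ h1) (pvReach_trans hstep (hE _ _ h2))
        · exact pvReach_trans (hE _ _ h1) (pvReach_trans (pvReach_symm hstep) (hE _ _ h2))
      · exact hE _ _ hab

lemma pvEA_iff {grid : List (List String)} (a b : Int × Int) :
    pvEA grid a b ↔ pvReach grid a b := by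
  constructor
  · exact fun h => pvExtend_le_reach
      (fun a b ⟨heq, hf⟩ => heq ▸ pvReach_refl hf)
      (fun e he => pvEdges_adj he) a b h
  · rintro ⟨hfa, hpath⟩
    have hPER : pvPER grid (pvEA grid) := pvPER_extend (pvPER_E0 grid) _
    induction hpath with
    | refl => exact hPER.1 a hfa
    | @tail m c hpm st ih =>
        have hfm : pvForest grid m := pvReach_forest ⟨hfa, hpm⟩
        have hfc : pvForest grid c := st.2.1
        have hedge : pvEA grid m c := by
          rcases st.1 with h | h | h | h
          · subst h
            exact pvExtend_edge (pvPER_E0 grid)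
              (pvEdges_mem_right ((pvForest_iff grid m).1 hfm).1).1 hfm hfc
          · subst h
            have h' := pvExtend_edge (pvPER_E0 grid)
              (pvEdges_mem_right ((pvForest_iff grid (m.1 - 1, m.2)).1 hfc).1).1 hfc
              (e := ((m.1 - 1, m.2), ((m.1 - 1 : Int) + 1, m.2)))
              (by show pvForest grid ((m.1 - 1 : Int) + 1, m.2)
                  rw [show ((m.1 - 1 : Int) + 1, m.2) = m from by
                    simp [Prod.ext_iff]]
                  exact hfm)
            rw [show ((m.1 - 1 : Int) + 1, m.2) = m from by simp [Prod.ext_iff]] at h'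
            exact hPER.2.1 _ _ h'
          · subst h
            exact pvExtend_edge (pvPER_E0 grid)
              (pvEdges_mem_right ((pvForest_iff grid m).1 hfm).1).2 hfm hfc
          · subst h
            have h' := pvExtend_edge (pvPER_E0 grid)
              (pvEdges_mem_right ((pvForest_iff grid (m.1, m.2 - 1)).1 hfc).1).2 hfc
              (e := ((m.1, m.2 - 1), (m.1, (m.2 - 1 : Int) + 1)))
              (by show pvForest grid (m.1, (m.2 - 1 : Int) + 1)
                  rw [show (m.1, (m.2 - 1 : Int) + 1) = m from by
                    simp [Prod.ext_iff]]
                  exact hfm)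
            rw [show (m.1, (m.2 - 1 : Int) + 1) = m from by simp [Prod.ext_iff]] at h'
            exact hPER.2.1 _ _ h'
        exact hPER.2.2.1 _ _ _ ih hedge


/-! Dictionary helper lemmas (not in the prelude): `erase`, `modify`, a constant-value
insert loop, and `values` membership. -/

lemma pvDict_get?_erase {κ ν : Type} [BEq κ] [LawfulBEq κ] [DecidableEq κ] (d : PySem.Dict κ ν) (k x : κ) :
    (d.erase k).get? x = if x = k then none else d.get? x := by
  obtain ⟨items⟩ := d
  show (List.find? (fun p => p.1 == x) (items.filter (fun p => !(p.1 == k)))).map (fun p => p.2) =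
    if x = k then none else (List.find? (fun p => p.1 == x) items).map (fun p => p.2)
  induction items with
  | nil => simp
  | cons a l ih =>
      by_cases hak : a.1 = k
      · rw [List.filter_cons_of_neg (by simp [hak])]
        rw [ih]
        by_cases hxk : x = k
        · simp [hxk]
        · simp only [if_neg hxk]
          rw [List.find?_cons_of_neg (by simp [hak]; exact fun h => hxk h.symm)]
      · rw [List.filter_cons_of_pos (by simp [hak])]
        by_cases hax : a.1 = x
        · rw [List.find?_cons_of_pos (by simp [hax]), List.find?_cons_of_pos (by simp [hax])]
          have hxk : ¬ x = k := by rw [← hax]; exact hak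
          simp [hxk]
        · rw [List.find?_cons_of_neg (by simp [hax]), List.find?_cons_of_neg (by simp [hax])]
          exact ih

lemma pvDict_keys_erase {κ ν : Type} [BEq κ] [LawfulBEq κ] (d : PySem.Dict κ ν) (k : κ) :
    (d.erase k).keys.Sublist d.keys := by
  obtain ⟨items⟩ := d
  show (List.map (fun p => p.1) (items.filter (fun p => !(p.1 == k)))).Sublist
    (List.map (fun p => p.1) items)
  exact List.Sublist.map _ List.filter_sublist

lemma pvDict_nodup_keys_erase {κ ν : Type} [BEq κ] [LawfulBEq κ] (d : PySem.Dict κ ν) (k : κ)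
    (h : d.keys.Nodup) : (d.erase k).keys.Nodup :=
  (pvDict_keys_erase d k).nodup h

lemma pvDict_get?_modify {κ ν : Type} [BEq κ] [LawfulBEq κ] [DecidableEq κ]
    (d : PySem.Dict κ ν) (k x : κ) (d0 : ν) (f : ν → ν) :
    (d.modify k d0 f).get? x = if x = k then some (f (d.getD k d0)) else d.get? x := by
  rw [PySem.Dict.modify, PySem.Dict.get?_insert]

lemma pvDict_nodup_keys_modify {κ ν : Type} [BEq κ] [LawfulBEq κ] (d : PySem.Dict κ ν)
    (k : κ) (d0 : ν) (f : ν → ν) (h : d.keys.Nodup) : (d.modify k d0 f).keys.Nodup := by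
  rw [PySem.Dict.modify]
  exact PySem.Dict.nodup_keys_insert d k _ h

lemma pvDict_get?_foldl_insert_const {κ ν : Type} [BEq κ] [LawfulBEq κ] [DecidableEq κ]
    (L : List κ) (v : ν) :
    ∀ (d : PySem.Dict κ ν) (x : κ),
      (L.foldl (fun d c => d.insert c v) d).get? x = if x ∈ L then some v else d.get? x := by
  induction L with
  | nil => intro d x; simp
  | cons c L ih =>
      intro d x
      rw [List.foldl_cons, ih]
      by_cases hx : x ∈ L
      · simp [hx]
      · rw [if_neg hx, PySem.Dict.get?_insert]
        by_cases hxc : x = c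
        · simp [hxc]
        · simp [hxc, hx]

lemma pvDict_mem_values {κ ν : Type} [BEq κ] [LawfulBEq κ] (d : PySem.Dict κ ν)
    (hnd : d.keys.Nodup) (v : ν) : v ∈ d.values ↔ ∃ k, d.get? k = some v := by
  constructor
  · intro hv
    obtain ⟨⟨k, w⟩, hmem, hw⟩ := List.mem_map.1 hv
    cases hw
    exact ⟨k, PySem.Dict.get?_of_mem_items d hmem hnd⟩
  · rintro ⟨k, hk⟩
    exact List.mem_map.2 ⟨(k, v), PySem.Dict.mem_items_of_get?_eq_some d hk, rfl⟩


/-! The disjoint-set invariant: `comp` maps every Forest cell to a representative of its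
current class, `members` lists each class under its representative. -/

structure pvInvB (grid : List (List String)) (comp : PySem.Dict (Int × Int) (Int × Int))
    (members : PySem.Dict (Int × Int) (List (Int × Int)))
    (E : (Int × Int) → (Int × Int) → Prop) : Prop where
  keys : ∀ p, comp.contains p = true ↔ pvForest grid p
  rep : ∀ p, pvForest grid p → ∃ r, comp.get? p = some r ∧ E r p
  eqr : ∀ p q, pvForest grid p → pvForest grid q → (comp.get? p = comp.get? q ↔ E p q)
  mem : ∀ r L, members.get? r = some L → ∀ x, (x ∈ L ↔ (pvForest grid x ∧ comp.get? x = some r))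
  repmem : ∀ p r, pvForest grid p → comp.get? p = some r → (members.get? r).isSome = true
  root : ∀ r, (members.get? r).isSome = true → comp.get? r = some r
  mnodup : members.keys.Nodup

lemma pvInvB_congr {grid : List (List String)} {comp : PySem.Dict (Int × Int) (Int × Int)}
    {members : PySem.Dict (Int × Int) (List (Int × Int))}
    {E E' : (Int × Int) → (Int × Int) → Prop} (h : ∀ a b, E a b ↔ E' a b)
    (hI : pvInvB grid comp members E) : pvInvB grid comp members E' where
  keys := hI.keys
  rep := fun p hp => (hI.rep p hp).imp (fun r ⟨h1, h2⟩ => ⟨h1, (h r p).1 h2⟩)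
  eqr := fun p q hp hq => (hI.eqr p q hp hq).trans (h p q)
  mem := hI.mem
  repmem := hI.repmem
  root := hI.root
  mnodup := hI.mnodup

lemma pvJoin_comm {E : (Int × Int) → (Int × Int) → Prop} (hsymm : ∀ a b, E a b → E b a)
    (p q a b : Int × Int) : pvJoin E p q a b ↔ pvJoin E q p a b := by
  unfold pvJoin; tauto

lemma pvJoin_self {grid : List (List String)} {E : (Int × Int) → (Int × Int) → Prop}
    (hPER : pvPER grid E) {p q : Int × Int} (hpq : E p q) (a b : Int × Int) :
    pvJoin E p q a b ↔ E a b := by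
  unfold pvJoin
  constructor
  · rintro (h | ⟨h1, h2⟩ | ⟨h1, h2⟩)
    · exact h
    · exact hPER.2.2.1 _ _ _ h1 (hPER.2.2.1 _ _ _ hpq h2)
    · exact hPER.2.2.1 _ _ _ h1 (hPER.2.2.1 _ _ _ (hPER.2.1 _ _ hpq) h2)
  · exact Or.inl

/-- Core of the merge: relabel `b0`'s members to `a0`, concatenate the member lists. -/
lemma pvMerge_core {grid : List (List String)} {comp : PySem.Dict (Int × Int) (Int × Int)}
    {members : PySem.Dict (Int × Int) (List (Int × Int))}
    {E : (Int × Int) → (Int × Int) → Prop}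
    (hI : pvInvB grid comp members E) (hPER : pvPER grid E) {p0 q0 a0 b0 : Int × Int}
    (hfp : pvForest grid p0) (hfq : pvForest grid q0)
    (hpa : comp.get? p0 = some a0) (hqb : comp.get? q0 = some b0) (hne : a0 ≠ b0) :
    pvInvB grid
      ((members.getD b0 []).foldl (fun d cell => d.insert cell a0) comp)
      ((members.modify a0 [] (fun l => l ++ members.getD b0 [])).erase b0)
      (pvJoin E p0 q0) := by
  have hEa : E a0 p0 := by
    obtain ⟨ra, hra, hEra⟩ := hI.rep p0 hfp
    rw [hpa] at hra; cases Option.some.inj hra; exact hEra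
  have hEb : E b0 q0 := by
    obtain ⟨rb, hrb, hErb⟩ := hI.rep q0 hfq
    rw [hqb] at hrb; cases Option.some.inj hrb; exact hErb
  have hfa0 : pvForest grid a0 := (hPER.2.2.2 _ _ hEa).1
  have hfb0 : pvForest grid b0 := (hPER.2.2.2 _ _ hEb).1
  have hroota : comp.get? a0 = some a0 := by
    have := (hI.eqr a0 p0 hfa0 hfp).2 hEa; rw [hpa] at this; exact this
  have hrootb : comp.get? b0 = some b0 := by
    have := (hI.eqr b0 q0 hfb0 hfq).2 hEb; rw [hqb] at this; exact this
  obtain ⟨La, hLa⟩ := Option.isSome_iff_exists.1 (hI.repmem a0 a0 hfa0 hroota)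
  obtain ⟨Lb, hLb⟩ := Option.isSome_iff_exists.1 (hI.repmem b0 b0 hfb0 hrootb)
  have hgetDa : members.getD a0 [] = La := by
    rw [PySem.Dict.getD_eq_get?_getD, hLa]; rfl
  have hgetDb : members.getD b0 [] = Lb := by
    rw [PySem.Dict.getD_eq_get?_getD, hLb]; rfl
  have hLbx : ∀ x, x ∈ Lb ↔ (pvForest grid x ∧ comp.get? x = some b0) := hI.mem b0 Lb hLb
  have hLax : ∀ x, x ∈ La ↔ (pvForest grid x ∧ comp.get? x = some a0) := hI.mem a0 La hLa
  have hC : ∀ x, ((members.getD b0 []).foldl (fun d cell => d.insert cell a0) comp).get? x =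
      if x ∈ Lb then some a0 else comp.get? x := by
    intro x; rw [hgetDb]; exact pvDict_get?_foldl_insert_const Lb a0 comp x
  have hCf : ∀ x, pvForest grid x →
      ((members.getD b0 []).foldl (fun d cell => d.insert cell a0) comp).get? x =
      if comp.get? x = some b0 then some a0 else comp.get? x := by
    intro x hx; rw [hC]
    by_cases h : comp.get? x = some b0
    · rw [if_pos ((hLbx x).2 ⟨hx, h⟩), if_pos h]
    · rw [if_neg (fun hm => h ((hLbx x).1 hm).2), if_neg h]
  have hM : ∀ r, ((members.modify a0 [] (fun l => l ++ members.getD b0 [])).erase b0).get? r =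
      if r = b0 then none else if r = a0 then some (La ++ Lb) else members.get? r := by
    intro r
    rw [pvDict_get?_erase]
    by_cases hrb0 : r = b0
    · rw [if_pos hrb0, if_pos hrb0]
    · rw [if_neg hrb0, if_neg hrb0, pvDict_get?_modify, hgetDa, hgetDb]
  have hEp : ∀ x, pvForest grid x → (E x p0 ↔ comp.get? x = some a0) := by
    intro x hx
    rw [← hI.eqr x p0 hx hfp, hpa]
  have hEq : ∀ x, pvForest grid x → (E x q0 ↔ comp.get? x = some b0) := by
    intro x hx
    rw [← hI.eqr x q0 hx hfq, hqb]
  have hE' : ∀ x y, pvForest grid x → pvForest grid y →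
      (pvJoin E p0 q0 x y ↔ (comp.get? x = comp.get? y ∨
        (comp.get? x = some a0 ∧ comp.get? y = some b0) ∨
        (comp.get? x = some b0 ∧ comp.get? y = some a0))) := by
    intro x y hx hy
    unfold pvJoin
    rw [hI.eqr x y hx hy, hEp x hx, hEq x hx]
    constructor
    · rintro (h | ⟨h1, h2⟩ | ⟨h1, h2⟩)
      · exact Or.inl h
      · exact Or.inr (Or.inl ⟨h1, (hEq y hy).1 (hPER.2.1 _ _ h2)⟩)
      · exact Or.inr (Or.inr ⟨h1, (hEp y hy).1 (hPER.2.1 _ _ h2)⟩)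
    · rintro (h | ⟨h1, h2⟩ | ⟨h1, h2⟩)
      · exact Or.inl h
      · exact Or.inr (Or.inl ⟨h1, hPER.2.1 _ _ ((hEq y hy).2 h2)⟩)
      · exact Or.inr (Or.inr ⟨h1, hPER.2.1 _ _ ((hEp y hy).2 h2)⟩)
  refine ⟨?_, ?_, ?_, ?_, ?_, ?_, ?_⟩
  · -- keys
    intro p
    rw [PySem.Dict.contains_eq_isSome_get?, hC]
    by_cases hp : p ∈ Lb
    · rw [if_pos hp]
      exact ⟨fun _ => ((hLbx p).1 hp).1, fun _ => rfl⟩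
    · rw [if_neg hp, ← PySem.Dict.contains_eq_isSome_get?]
      exact hI.keys p
  · -- rep
    intro x hx
    rw [hCf x hx]
    by_cases h : comp.get? x = some b0
    · rw [if_pos h]
      exact ⟨a0, rfl, Or.inr (Or.inl ⟨hEa, hPER.2.1 _ _ ((hEq x hx).2 h)⟩)⟩
    · rw [if_neg h]
      obtain ⟨r, hr, hEr⟩ := hI.rep x hx
      exact ⟨r, hr, Or.inl hEr⟩
  · -- eqr
    intro x y hx hy
    rw [hCf x hx, hCf y hy, hE' x y hx hy]
    have hba : (some b0 : Option (Int × Int)) ≠ some a0 :=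
      fun h => hne (Option.some.inj h).symm
    by_cases h1 : comp.get? x = some b0 <;> by_cases h2 : comp.get? y = some b0
    · rw [if_pos h1, if_pos h2]
      simp only [h1, h2]
      tauto
    · rw [if_pos h1, if_neg h2]
      constructor
      · intro h; exact Or.inr (Or.inr ⟨h1, h.symm⟩)
      · rintro (h | ⟨h', _⟩ | ⟨_, h''⟩)
        · rw [h1] at h; exact absurd h.symm h2
        · rw [h1] at h'; exact absurd h' hba
        · exact h''.symm
    · rw [if_neg h1, if_pos h2]
      constructor
      · intro h; exact Or.inr (Or.inl ⟨h, h2⟩)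
      · rintro (h | ⟨h', _⟩ | ⟨h', _⟩)
        · rw [h2] at h; exact absurd h h1
        · exact h'
        · exact absurd h' h1
    · rw [if_neg h1, if_neg h2]
      constructor
      · exact Or.inl
      · rintro (h | ⟨_, h''⟩ | ⟨h', _⟩)
        · exact h
        · exact absurd h'' h2
        · exact absurd h' h1
  · -- mem
    intro r L' hL' x
    rw [hM] at hL'
    by_cases hrb0 : r = b0
    · rw [if_pos hrb0] at hL'; cases hL'
    · rw [if_neg hrb0] at hL'
      by_cases hra0 : r = a0
      · rw [if_pos hra0] at hL'
        cases Option.some.inj hL'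
        subst hra0
        rw [List.mem_append, hLax, hLbx, hC]
        by_cases hxb : x ∈ Lb
        · simp only [if_pos hxb]
          have := (hLbx x).1 hxb
          tauto
        · simp only [if_neg hxb]
          rw [hLbx] at hxb
          tauto
      · rw [if_neg hra0] at hL'
        rw [hI.mem r L' hL' x, hC]
        by_cases hxb : x ∈ Lb
        · rw [if_pos hxb]
          have hxb' := (hLbx x).1 hxb
          constructor
          · rintro ⟨_, hh⟩
            rw [hxb'.2] at hh
            exact absurd (Option.some.inj hh).symm hrb0
          · rintro ⟨_, hh⟩
            exact absurd (Option.some.inj hh).symm hra0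
        · rw [if_neg hxb]
  · -- repmem
    intro x r hx hr
    rw [hCf x hx] at hr
    rw [hM]
    by_cases h : comp.get? x = some b0
    · rw [if_pos h] at hr
      cases Option.some.inj hr
      rw [if_neg (fun hh => hne hh), if_pos rfl]
      rfl
    · rw [if_neg h] at hr
      have hrb0 : r ≠ b0 := fun hh => h (by rw [hr, hh])
      rw [if_neg hrb0]
      by_cases hra0 : r = a0
      · rw [if_pos hra0]; rfl
      · rw [if_neg hra0]
        exact hI.repmem x r hx hr
  · -- root
    intro r hr
    rw [hM] at hr
    by_cases hrb0 : r = b0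
    · rw [if_pos hrb0] at hr; cases hr
    · rw [if_neg hrb0] at hr
      rw [hC]
      by_cases hra0 : r = a0
      · subst hra0
        rw [if_neg (fun hm => hne (Option.some.inj (hroota ▸ ((hLbx r).1 hm).2).symm).symm)]
        exact hroota
      · rw [if_neg hra0] at hr
        have := hI.root r hr
        rw [if_neg (fun hm => hrb0 (Option.some.inj (this ▸ ((hLbx r).1 hm).2)))]
        exact this
  · -- mnodup
    exact pvDict_nodup_keys_erase _ _ (pvDict_nodup_keys_modify _ _ _ _ hI.mnodup)


/-! B's phase-1 step functions (verbatim from the port) and their invariant preservation. -/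

def pvEStep (grid : List (List String)) (q : Int × Int)
    (s : PySem.Dict (Int × Int) (Int × Int) × PySem.Dict (Int × Int) (List (Int × Int)))
    (nbr : Int × Int) :
    PySem.Dict (Int × Int) (Int × Int) × PySem.Dict (Int × Int) (List (Int × Int)) :=
  if s.1.contains nbr then
    let a := s.1.getD (q.1, q.2) (q.1, q.2)
    let b := s.1.getD nbr nbr
    if a ≠ b then
      let ab := if (s.2.getD a []).length < (s.2.getD b []).length then (b, a) else (a, b)
      ((s.2.getD ab.2 []).foldl (fun d cell => d.insert cell ab.1) s.1,
       (s.2.modify ab.1 [] (fun l => l ++ s.2.getD ab.2 [])).erase ab.2)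
    else s
  else s

def pvStep1 (grid : List (List String))
    (s : PySem.Dict (Int × Int) (Int × Int) × PySem.Dict (Int × Int) (List (Int × Int)))
    (q : Int × Int) :
    PySem.Dict (Int × Int) (Int × Int) × PySem.Dict (Int × Int) (List (Int × Int)) :=
  if s.1.contains (q.1, q.2) then
    [((q.1 + 1 : Int), (q.2 : Int)), (q.1, (q.2 + 1 : Int))].foldl (pvEStep grid q) s
  else s

lemma pvEStep_inv {grid : List (List String)}
    {s : PySem.Dict (Int × Int) (Int × Int) × PySem.Dict (Int × Int) (List (Int × Int))}
    {E : (Int × Int) → (Int × Int) → Prop}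
    (hI : pvInvB grid s.1 s.2 E) (hPER : pvPER grid E)
    (q nbr : Int × Int) (hq : pvForest grid q) :
    pvInvB grid (pvEStep grid q s nbr).1 (pvEStep grid q s nbr).2
      (pvAddE grid E (q, nbr)) := by
  by_cases hc : s.1.contains nbr = true
  · have hfn : pvForest grid nbr := (hI.keys nbr).1 hc
    have hadd : pvAddE grid E (q, nbr) = pvJoin E q nbr := by
      unfold pvAddE
      rw [if_pos (by simp only [Bool.and_eq_true]; exact ⟨hq, hfn⟩)]
    obtain ⟨ra, hra, hEra⟩ := hI.rep q hq
    obtain ⟨rb, hrb, hErb⟩ := hI.rep nbr hfn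
    have hgq : s.1.getD (q.1, q.2) (q.1, q.2) = ra := by
      rw [PySem.Dict.getD_eq_get?_getD]
      rw [show s.1.get? (q.1, q.2) = s.1.get? q from rfl, hra]
      rfl
    have hgn : s.1.getD nbr nbr = rb := by
      rw [PySem.Dict.getD_eq_get?_getD, hrb]; rfl
    have hstep : pvEStep grid q s nbr =
        (if ra ≠ rb then
          (let ab := if (s.2.getD ra []).length < (s.2.getD rb []).length
              then (rb, ra) else (ra, rb)
           ((s.2.getD ab.2 []).foldl (fun d cell => d.insert cell ab.1) s.1,
            (s.2.modify ab.1 [] (fun l => l ++ s.2.getD ab.2 [])).erase ab.2))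
         else s) := by
      unfold pvEStep
      rw [if_pos hc, hgq, hgn]
    rw [hadd, hstep]
    by_cases hab : ra ≠ rb
    · rw [if_pos hab]
      by_cases hlen : (s.2.getD ra []).length < (s.2.getD rb []).length
      · rw [if_pos hlen]
        have hcore := pvMerge_core hI hPER hfn hq hrb hra (Ne.symm hab)
        exact pvInvB_congr (fun a b => (pvJoin_comm hPER.2.1 nbr q a b)) hcore
      · rw [if_neg hlen]
        exact pvMerge_core hI hPER hq hfn hra hrb hab
    · rw [if_neg hab]
      push Not at hab
      subst hab
      have hEqn : E q nbr := by
        rw [← hI.eqr q nbr hq hfn, hra, hrb]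
      exact pvInvB_congr (fun a b => (pvJoin_self hPER hEqn a b).symm) hI
  · have hfn : ¬ pvForest grid nbr := fun h => hc ((hI.keys nbr).2 h)
    have hadd : pvAddE grid E (q, nbr) = E := by
      unfold pvAddE
      rw [if_neg (by simp only [Bool.and_eq_true]; exact fun h => hfn h.2)]
    have hstep : pvEStep grid q s nbr = s := by
      unfold pvEStep
      rw [if_neg hc]
    rw [hadd, hstep]
    exact hI

lemma pvStep1_inv {grid : List (List String)}
    {s : PySem.Dict (Int × Int) (Int × Int) × PySem.Dict (Int × Int) (List (Int × Int))}
    {E : (Int × Int) → (Int × Int) → Prop}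
    (hI : pvInvB grid s.1 s.2 E) (hPER : pvPER grid E) (q : Int × Int) :
    pvInvB grid (pvStep1 grid s q).1 (pvStep1 grid s q).2
      (pvExtend grid E [(q, (q.1 + 1, q.2)), (q, (q.1, q.2 + 1))]) := by
  have hext : pvExtend grid E [(q, (q.1 + 1, q.2)), (q, (q.1, q.2 + 1))] =
      pvAddE grid (pvAddE grid E (q, (q.1 + 1, q.2))) (q, (q.1, q.2 + 1)) := rfl
  by_cases hc : s.1.contains (q.1, q.2) = true
  · have hq : pvForest grid q := (hI.keys q).1 (by exact hc)
    have hstep : pvStep1 grid s q =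
        pvEStep grid q (pvEStep grid q s ((q.1 + 1 : Int), (q.2 : Int)))
          (q.1, (q.2 + 1 : Int)) := by
      unfold pvStep1
      rw [if_pos hc, List.foldl_cons, List.foldl_cons, List.foldl_nil]
    rw [hstep, hext]
    have h1 := pvEStep_inv hI hPER q ((q.1 + 1 : Int), (q.2 : Int)) hq
    have h2 := pvEStep_inv h1 (pvPER_addE hPER _) q (q.1, (q.2 + 1 : Int)) hq
    exact h2
  · have hq : ¬ pvForest grid q := fun h => hc ((hI.keys q).2 h)
    have hstep : pvStep1 grid s q = s := by
      unfold pvStep1; rw [if_neg hc]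
    have hE1 : pvAddE grid E (q, ((q.1 + 1 : Int), (q.2 : Int))) = E := by
      unfold pvAddE
      rw [if_neg (by simp only [Bool.and_eq_true]; exact fun h => hq h.1)]
    have hE2 : pvAddE grid E (q, (q.1, (q.2 + 1 : Int))) = E := by
      unfold pvAddE
      rw [if_neg (by simp only [Bool.and_eq_true]; exact fun h => hq h.1)]
    rw [hstep, hext, hE1, hE2]
    exact hI

lemma pvFold1_inv {grid : List (List String)} :
    ∀ (cells : List (Int × Int))
      (s : PySem.Dict (Int × Int) (Int × Int) × PySem.Dict (Int × Int) (List (Int × Int)))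
      (E : (Int × Int) → (Int × Int) → Prop),
    pvInvB grid s.1 s.2 E → pvPER grid E →
    pvInvB grid (cells.foldl (pvStep1 grid) s).1 (cells.foldl (pvStep1 grid) s).2
      (pvExtend grid E (cells.flatMap (fun q => [(q, (q.1 + 1, q.2)), (q, (q.1, q.2 + 1))]))) := by
  intro cells
  induction cells with
  | nil => intro s E hI _; exact hI
  | cons a l ih =>
      intro s E hI hPER
      rw [List.foldl_cons, List.flatMap_cons]
      rw [show pvExtend grid E ([(a, (a.1 + 1, a.2)), (a, (a.1, a.2 + 1))] ++
          l.flatMap (fun q => [(q, (q.1 + 1, q.2)), (q, (q.1, q.2 + 1))])) =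
        pvExtend grid (pvExtend grid E [(a, (a.1 + 1, a.2)), (a, (a.1, a.2 + 1))])
          (l.flatMap (fun q => [(q, (q.1 + 1, q.2)), (q, (q.1, q.2 + 1))])) from by
        unfold pvExtend; rw [List.foldl_append]]
      exact ih (pvStep1 grid s a) _ (pvStep1_inv hI hPER a)
        (pvPER_extend hPER _)


/-! B's phase 0: every Forest cell becomes its own singleton class. -/

def pvStep0 (grid : List (List String))
    (s : PySem.Dict (Int × Int) (Int × Int) × PySem.Dict (Int × Int) (List (Int × Int)))
    (q : Int × Int) :
    PySem.Dict (Int × Int) (Int × Int) × PySem.Dict (Int × Int) (List (Int × Int)) :=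
  if pvCell grid q.1 q.2 = "Forest" then
    (s.1.insert (q.1, q.2) (q.1, q.2), s.2.insert (q.1, q.2) [((q.1 : Int), (q.2 : Int))])
  else s

lemma pvFold0 (grid : List (List String)) :
    ∀ (cells seen : List (Int × Int)) (d : PySem.Dict (Int × Int) (Int × Int))
      (m : PySem.Dict (Int × Int) (List (Int × Int))),
    (∀ p ∈ cells, pvInb grid p) →
    (∀ x, d.get? x = if pvForest grid x ∧ x ∈ seen then some x else none) →
    (∀ x, m.get? x = if pvForest grid x ∧ x ∈ seen then some [x] else none) →
    m.keys.Nodup →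
    ((∀ x, (cells.foldl (pvStep0 grid) (d, m)).1.get? x =
        if pvForest grid x ∧ (x ∈ seen ∨ x ∈ cells) then some x else none) ∧
     (∀ x, (cells.foldl (pvStep0 grid) (d, m)).2.get? x =
        if pvForest grid x ∧ (x ∈ seen ∨ x ∈ cells) then some [x] else none) ∧
     (cells.foldl (pvStep0 grid) (d, m)).2.keys.Nodup) := by
  intro cells
  induction cells with
  | nil =>
      intro seen d m _ hd hm hnd
      refine ⟨fun x => ?_, fun x => ?_, hnd⟩ <;>
        simp only [List.foldl_nil, List.not_mem_nil, or_false] <;>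
        first
          | exact hd x
          | exact hm x
  | cons a l ih =>
      intro seen d m hinb hd hm hnd
      rw [List.foldl_cons]
      by_cases hcf : pvCell grid a.1 a.2 = "Forest"
      · have hfa : pvForest grid a :=
          (pvForest_iff grid a).2 ⟨hinb a List.mem_cons_self, hcf⟩
        have hstep : pvStep0 grid (d, m) a =
            (d.insert (a.1, a.2) (a.1, a.2), m.insert (a.1, a.2) [((a.1 : Int), (a.2 : Int))]) := by
          unfold pvStep0; rw [if_pos hcf]
        rw [hstep]
        obtain ⟨h1, h2, h3⟩ := ih (seen ++ [a]) _ _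
          (fun p hp => hinb p (List.mem_cons_of_mem _ hp))
          (fun x => by
            rw [PySem.Dict.get?_insert, hd x]
            by_cases hxa : x = a
            · subst hxa
              rw [if_pos rfl, if_pos ⟨hfa, by simp⟩]
            · rw [if_neg (by simpa using hxa)]
              apply if_congr _ rfl rfl
              constructor
              · rintro ⟨hf, hs⟩; exact ⟨hf, by simp [hs]⟩
              · rintro ⟨hf, hs⟩
                refine ⟨hf, ?_⟩
                rcases List.mem_append.1 hs with h | h
                · exact h
                · rw [List.mem_singleton] at h; exact absurd h hxa)
          (fun x => by
            rw [PySem.Dict.get?_insert, hm x]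
            by_cases hxa : x = a
            · subst hxa
              rw [if_pos rfl, if_pos ⟨hfa, by simp⟩]
            · rw [if_neg (by simpa using hxa)]
              apply if_congr _ rfl rfl
              constructor
              · rintro ⟨hf, hs⟩; exact ⟨hf, by simp [hs]⟩
              · rintro ⟨hf, hs⟩
                refine ⟨hf, ?_⟩
                rcases List.mem_append.1 hs with h | h
                · exact h
                · rw [List.mem_singleton] at h; exact absurd h hxa)
          (PySem.Dict.nodup_keys_insert m _ _ hnd)
        refine ⟨fun x => ?_, fun x => ?_, h3⟩
        · rw [h1 x]
          apply if_congr _ rfl rfl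
          constructor
          · rintro ⟨hf, hs⟩
            refine ⟨hf, ?_⟩
            rcases hs with h | h
            · rcases List.mem_append.1 h with h' | h'
              · exact Or.inl h'
              · rw [List.mem_singleton] at h'; exact Or.inr (h' ▸ List.mem_cons_self)
            · exact Or.inr (List.mem_cons_of_mem _ h)
          · rintro ⟨hf, hs⟩
            refine ⟨hf, ?_⟩
            rcases hs with h | h
            · exact Or.inl (List.mem_append_left _ h)
            · rcases List.mem_cons.1 h with h' | h'
              · exact Or.inl (List.mem_append_right _ (by simp [h']))
              · exact Or.inr h'
        · rw [h2 x]
          apply if_congr _ rfl rfl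
          constructor
          · rintro ⟨hf, hs⟩
            refine ⟨hf, ?_⟩
            rcases hs with h | h
            · rcases List.mem_append.1 h with h' | h'
              · exact Or.inl h'
              · rw [List.mem_singleton] at h'; exact Or.inr (h' ▸ List.mem_cons_self)
            · exact Or.inr (List.mem_cons_of_mem _ h)
          · rintro ⟨hf, hs⟩
            refine ⟨hf, ?_⟩
            rcases hs with h | h
            · exact Or.inl (List.mem_append_left _ h)
            · rcases List.mem_cons.1 h with h' | h'
              · exact Or.inl (List.mem_append_right _ (by simp [h']))
              · exact Or.inr h'
      · have hstep : pvStep0 grid (d, m) a = (d, m) := by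
          unfold pvStep0; rw [if_neg hcf]
        rw [hstep]
        have hnfa : ¬ pvForest grid a := fun h => hcf ((pvForest_iff grid a).1 h).2
        obtain ⟨h1, h2, h3⟩ := ih seen d m
          (fun p hp => hinb p (List.mem_cons_of_mem _ hp)) hd hm hnd
        refine ⟨fun x => ?_, fun x => ?_, h3⟩ <;>
          [rw [h1 x]; rw [h2 x]] <;>
          · apply if_congr _ rfl rfl
            constructor
            · rintro ⟨hf, hs⟩
              exact ⟨hf, hs.imp id (List.mem_cons_of_mem _)⟩
            · rintro ⟨hf, hs⟩
              refine ⟨hf, hs.imp id (fun h => ?_)⟩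
              rcases List.mem_cons.1 h with h' | h'
              · exact absurd (h' ▸ hf) hnfa
              · exact h'

/-- The invariant holds after phase 0, for the trivial relation. -/
lemma pvInit_inv (grid : List (List String)) :
    pvInvB grid ((pvCells grid).foldl (pvStep0 grid)
        (PySem.Dict.empty, PySem.Dict.empty)).1
      ((pvCells grid).foldl (pvStep0 grid) (PySem.Dict.empty, PySem.Dict.empty)).2
      (pvE0 grid) := by
  obtain ⟨h1, h2, h3⟩ := pvFold0 grid (pvCells grid) [] PySem.Dict.empty PySem.Dict.empty
    (fun p hp => mem_pvCells.1 hp)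
    (fun x => by simp [PySem.Dict.get?_empty])
    (fun x => by simp [PySem.Dict.get?_empty])
    (by simp [PySem.Dict.keys, PySem.Dict.empty])
  have hc : ∀ x, ((pvCells grid).foldl (pvStep0 grid)
      (PySem.Dict.empty, PySem.Dict.empty)).1.get? x =
      if pvForest grid x then some x else none := by
    intro x
    rw [h1 x]
    apply if_congr _ rfl rfl
    constructor
    · exact fun h => h.1
    · exact fun h => ⟨h, Or.inr (mem_pvCells.2 ((pvForest_iff grid x).1 h).1)⟩
  have hmch : ∀ x, ((pvCells grid).foldl (pvStep0 grid)
      (PySem.Dict.empty, PySem.Dict.empty)).2.get? x =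
      if pvForest grid x then some [x] else none := by
    intro x
    rw [h2 x]
    apply if_congr _ rfl rfl
    constructor
    · exact fun h => h.1
    · exact fun h => ⟨h, Or.inr (mem_pvCells.2 ((pvForest_iff grid x).1 h).1)⟩
  refine ⟨?_, ?_, ?_, ?_, ?_, ?_, h3⟩
  · intro p
    rw [PySem.Dict.contains_eq_isSome_get?, hc p]
    by_cases hp : pvForest grid p
    · rw [if_pos hp]; exact ⟨fun _ => hp, fun _ => rfl⟩
    · rw [if_neg hp]; exact ⟨fun h => by simp at h, fun h => absurd h hp⟩
  · intro p hp
    exact ⟨p, by rw [hc p, if_pos hp], rfl, hp⟩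
  · intro p q hp hq
    rw [hc p, hc q, if_pos hp, if_pos hq]
    constructor
    · intro h; exact ⟨Option.some.inj h, hp⟩
    · rintro ⟨rfl, _⟩; rfl
  · intro r L hL x
    rw [hmch r] at hL
    by_cases hr : pvForest grid r
    · rw [if_pos hr] at hL
      cases Option.some.inj hL
      rw [List.mem_singleton, hc x]
      constructor
      · rintro rfl; exact ⟨hr, by rw [if_pos hr]⟩
      · rintro ⟨hf, hx⟩
        rw [if_pos hf] at hx
        exact Option.some.inj hx
    · rw [if_neg hr] at hL; cases hL
  · intro p r hp hr
    rw [hc p, if_pos hp] at hr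
    cases Option.some.inj hr
    rw [hmch p, if_pos hp]
    rfl
  · intro r hr
    rw [hmch r] at hr
    by_cases h : pvForest grid r
    · rw [hc r, if_pos h]
    · rw [if_neg h] at hr; cases hr

/-- After phase 1, the member lists are exactly the Forest clusters. -/
lemma pvFamilyB_of_inv {grid : List (List String)}
    {comp : PySem.Dict (Int × Int) (Int × Int)}
    {members : PySem.Dict (Int × Int) (List (Int × Int))}
    (hI : pvInvB grid comp members (pvEA grid)) :
    pvFamily grid members.values := by
  constructor
  · intro K hK
    obtain ⟨r, hr⟩ := (pvDict_mem_values members hI.mnodup K).1 hK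
    have hroot : comp.get? r = some r := hI.root r (by rw [hr]; rfl)
    have hfr : pvForest grid r := by
      rw [← hI.keys r, PySem.Dict.contains_eq_isSome_get?, hroot]; rfl
    refine ⟨r, hfr, fun x => ?_⟩
    rw [hI.mem r K hr x]
    constructor
    · rintro ⟨hfx, hx⟩
      have : comp.get? x = comp.get? r := by rw [hx, hroot]
      have hE := (hI.eqr x r hfx hfr).1 this
      exact pvReach_symm ((pvEA_iff x r).1 hE)
    · intro hre
      have hfx : pvForest grid x := pvReach_forest hre
      have hE : pvEA grid x r := (pvEA_iff x r).2 (pvReach_symm hre)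
      have := (hI.eqr x r hfx hfr).2 hE
      exact ⟨hfx, by rw [this, hroot]⟩
  · intro p hp
    obtain ⟨r, hr, _⟩ := hI.rep p hp
    obtain ⟨L, hL⟩ := Option.isSome_iff_exists.1 (hI.repmem p r hp hr)
    refine ⟨L, (pvDict_mem_values members hI.mnodup L).2 ⟨r, hL⟩, ?_⟩
    rw [hI.mem r L hL p]
    exact ⟨hp, hr⟩


def pvPhase0B (grid : List (List String)) :
    PySem.Dict (Int × Int) (Int × Int) × PySem.Dict (Int × Int) (List (Int × Int)) :=
  (PySem.List.pyRange 0 (grid.length : Int) 1).foldl (fun s r =>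
    (PySem.List.pyRange 0 ((grid.headD []).length : Int) 1).foldl (fun s c =>
      if pvCell grid r c = "Forest" then
        (s.1.insert (r, c) (r, c), s.2.insert (r, c) [((r : Int), (c : Int))])
      else s) s)
    ((PySem.Dict.empty : PySem.Dict (Int × Int) (Int × Int)),
     (PySem.Dict.empty : PySem.Dict (Int × Int) (List (Int × Int))))

def pvPhase1B (grid : List (List String))
    (s0 : PySem.Dict (Int × Int) (Int × Int) × PySem.Dict (Int × Int) (List (Int × Int))) :
    PySem.Dict (Int × Int) (Int × Int) × PySem.Dict (Int × Int) (List (Int × Int)) :=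
  (PySem.List.pyRange 0 (grid.length : Int) 1).foldl (fun s r =>
    (PySem.List.pyRange 0 ((grid.headD []).length : Int) 1).foldl (fun s c =>
      if s.1.contains (r, c) then
        [((r + 1 : Int), (c : Int)), (r, (c + 1 : Int))].foldl (fun s nbr =>
          if s.1.contains nbr then
            let a := s.1.getD (r, c) (r, c)
            let b := s.1.getD nbr nbr
            if a ≠ b then
              let ab := if (s.2.getD a []).length < (s.2.getD b []).length
                then (b, a) else (a, b)
              ((s.2.getD ab.2 []).foldl (fun d cell => d.insert cell ab.1) s.1,
               (s.2.modify ab.1 [] (fun l => l ++ s.2.getD ab.2 [])).erase ab.2)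
            else s
          else s) s
      else s) s) s0

lemma pvPhase0B_eq (grid : List (List String)) :
    pvPhase0B grid = (pvCells grid).foldl (pvStep0 grid)
      ((PySem.Dict.empty : PySem.Dict (Int × Int) (Int × Int)),
       (PySem.Dict.empty : PySem.Dict (Int × Int) (List (Int × Int)))) := by
  rw [pvPhase0B, pvCells, List.foldl_flatMap]
  simp only [List.foldl_map]
  rfl

lemma pvPhase1B_eq (grid : List (List String))
    (s0 : PySem.Dict (Int × Int) (Int × Int) × PySem.Dict (Int × Int) (List (Int × Int))) :
    pvPhase1B grid s0 = (pvCells grid).foldl (pvStep1 grid) s0 := by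
  rw [pvPhase1B, pvCells, List.foldl_flatMap]
  simp only [List.foldl_map]
  rfl

/-- B's result, characterised purely by the connectivity predicates. -/
lemma stonesideB_char (grid : List (List String)) :
    ∃ tot : PySem.Set (Int × Int),
      stoneside_progress_alt grid = (PySem.Set.len tot : Int) * 3 ∧ tot.Nodup ∧
      (∀ x, x ∈ tot ↔ ∃ p, pvForest grid p ∧ pvTwoC grid p ∧ pvMntC grid p x) := by
  have h0 : stoneside_progress_alt grid =
      (PySem.Set.len
        (List.foldl
          (fun tot cluster => if 2 ≤ PySem.Set.len (pvMountsB grid cluster) then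
            PySem.Set.union tot (pvMountsB grid cluster) else tot)
          (PySem.Set.empty : PySem.Set (Int × Int))
          (PySem.Dict.values (pvPhase1B grid (pvPhase0B grid)).2)) : Int) * 3 := by
    cases grid <;> rfl
  rw [pvPhase0B_eq, pvPhase1B_eq] at h0
  have hInv := pvFold1_inv (grid := grid) (pvCells grid)
    ((pvCells grid).foldl (pvStep0 grid)
      ((PySem.Dict.empty : PySem.Dict (Int × Int) (Int × Int)),
       (PySem.Dict.empty : PySem.Dict (Int × Int) (List (Int × Int)))))
    (pvE0 grid) (pvInit_inv grid) (pvPER_E0 grid)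
  have hInv' : pvInvB grid
      ((pvCells grid).foldl (pvStep1 grid)
        ((pvCells grid).foldl (pvStep0 grid)
          ((PySem.Dict.empty : PySem.Dict (Int × Int) (Int × Int)),
           (PySem.Dict.empty : PySem.Dict (Int × Int) (List (Int × Int)))))).1
      ((pvCells grid).foldl (pvStep1 grid)
        ((pvCells grid).foldl (pvStep0 grid)
          ((PySem.Dict.empty : PySem.Dict (Int × Int) (Int × Int)),
           (PySem.Dict.empty : PySem.Dict (Int × Int) (List (Int × Int)))))).2
      (pvEA grid) := hInv
  have hfamily := pvFamilyB_of_inv hInv'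
  obtain ⟨hnd, hmem⟩ := pvTotal_spec grid (pvMountsB grid)
    (fun K => (pvMountsB_spec grid K).1) (fun K x => (pvMountsB_spec grid K).2 x)
    (PySem.Dict.values ((pvCells grid).foldl (pvStep1 grid)
      ((pvCells grid).foldl (pvStep0 grid)
        ((PySem.Dict.empty : PySem.Dict (Int × Int) (Int × Int)),
         (PySem.Dict.empty : PySem.Dict (Int × Int) (List (Int × Int)))))).2)
    PySem.Set.empty List.nodup_nil
  refine ⟨_, h0, hnd, fun x => ?_⟩
  rw [hmem x]
  simp only [PySem.Set.empty, List.not_mem_nil, false_or]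
  exact pvFamily_char hfamily x

-- ===== VERDICT (by name: the statement is the Claim_ definition above) =====
theorem stoneside_progress_spec : Claim_equal_stoneside_progress := by
  intro grid _ _
  unfold Spec_stoneside_progress
  obtain ⟨tA, hA, hndA, hmA⟩ := stonesideA_char grid
  obtain ⟨tB, hB, hndB, hmB⟩ := stonesideB_char grid
  rw [hA, hB]
  have hperm : tA.Perm tB :=
    (List.perm_ext_iff_of_nodup hndA hndB).2 (fun x => by rw [hmA x, hmB x])
  rw [PySem.Set.len, PySem.Set.len, hperm.length_eq]
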